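-- pv_equiv track=rewrite | github.com/cyless-hj/TIL | Algorithm/Programmers/LV2/무인도 여행.py | solution
-- ===== SOURCE A (Python) =====
-- from collections import deque
--
-- def solution(maps):
--     answer = []
--     maps = [list(m) for m in maps]
--
--     dx = [-1, 1, 0, 0]
--     dy = [0, 0, -1, 1]
--
--     def bfs(x ,y):
--         if maps[x][y] != 'X':
--             cnt = [int(maps[x][y])]
--         else:
--             cnt = []
--
--         queue = deque([(x, y)])
--         while queue:
--             x, y = queue.popleft()
--             for i in range(4):
--                 nx = x + dx[i]
--                 ny = y + dy[i]
--                 if nx < 0 or nx >= len(maps) or ny < 0 or ny >= len(maps[0]):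
--                     continue
--                 if maps[nx][ny] == 'X':
--                     continue
--                 if maps[nx][ny] != 'X':
--                     queue.append((nx, ny))
--                     cnt.append(int(maps[nx][ny]))
--                     maps[nx][ny] = 'X'
--         if len(cnt) != 1:
--             cnt = cnt[1:]
--
--         return cnt
--
--     for i in range(len(maps)):
--         for j in range(len(maps[0])):
--             if maps[i][j] != 'X':
--                 b = bfs(i, j)
--                 if b != 0:
--                     answer.append(sum(b))
--     answer.sort()
--
--     if len(answer) == 0:
--         answer = [-1]
--
--     return answer
-- ===== SOURCE B (Python) =====
-- def solution(maps):
--     h = len(maps)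
--     w = len(maps[0]) if maps else 0
--     # label grid: flattened index for land cells, None for 'X'
--     label = [[(i * w + j if maps[i][j] != 'X' else None) for j in range(w)]
--              for i in range(h)]
--     # propagate the minimum label across each island until a full sweep changes nothing
--     changed = True
--     while changed:
--         changed = False
--         for i in range(h):
--             for j in range(w):
--                 if label[i][j] is None:
--                     continue
--                 m = label[i][j]
--                 for ni, nj in ((i - 1, j), (i + 1, j), (i, j - 1), (i, j + 1)):
--                     if 0 <= ni < h and 0 <= nj < w and label[ni][nj] is not None and label[ni][nj] < m:
--                         m = label[ni][nj]
--                 if m < label[i][j]: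
--                     label[i][j] = m
--                     changed = True
--     # group the cell values by final label (one label per island)
--     sums = {}
--     for i in range(h):
--         for j in range(w):
--             if label[i][j] is not None:
--                 sums[label[i][j]] = sums.get(label[i][j], 0) + int(maps[i][j])
--     ans = sorted(sums.values())
--     return ans if ans else [-1]
-- ===== Notes on version B (the rewrite author's own statement) =====
-- stated objective: alternative
-- what changed: Replaces A's per-island BFS flood fill (deque + in-place 'X' marking, double-counted start cell sliced off) by a search-free fixed-point algorithm: every land cell starts with its own flattened index as a label, whole-grid sweeps repeatedly replace each label by the minimum of its neighbours' labels until nothing changes, and the values are then grouped by final label in a dict.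
import Mathlib
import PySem

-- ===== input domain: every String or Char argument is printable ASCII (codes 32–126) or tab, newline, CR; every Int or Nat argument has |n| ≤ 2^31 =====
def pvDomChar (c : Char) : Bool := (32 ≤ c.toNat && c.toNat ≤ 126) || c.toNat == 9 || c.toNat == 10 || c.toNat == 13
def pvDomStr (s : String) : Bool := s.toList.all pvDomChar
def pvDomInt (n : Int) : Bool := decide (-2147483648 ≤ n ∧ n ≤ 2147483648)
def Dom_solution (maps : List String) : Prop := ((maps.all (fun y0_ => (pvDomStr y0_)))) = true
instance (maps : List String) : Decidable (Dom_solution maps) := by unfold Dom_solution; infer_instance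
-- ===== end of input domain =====

-- B replaces A's BFS flood fill by min-label propagation to a fixed point plus dict grouping;
-- equal return values (A mutates only a local copy of the grid, so neither mutates the input).

-- ===== PORT A =====

-- int(ch) on a one-character string, total form; exact wherever Pre_ admits the cell (a digit)
def intAt (c : Char) : Int := (PySem.Int.ofChars? [c]).getD 0

-- maps[x][y] read; only used after 0 ≤ x < h, 0 ≤ y < w guards (exact there)
def cellA (g : List (List Char)) (x y : Int) : Char := (g.getD x.toNat []).getD y.toNat 'X'

-- maps[x][y] = 'X'
def setX (g : List (List Char)) (x y : Int) : List (List Char) :=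
  g.set x.toNat ((g.getD x.toNat []).set y.toNat 'X')

-- one neighbour probe of A's inner 'for i in range(4)' body: state = (maps, queue, cnt)
def bfsVisit (h w : Int) (st : List (List Char) × List (Int × Int) × List Int) (nx ny : Int) :
    List (List Char) × List (Int × Int) × List Int :=
  if nx < 0 ∨ h ≤ nx ∨ ny < 0 ∨ w ≤ ny then st
  else if cellA st.1 nx ny = 'X' then st
  else (setX st.1 nx ny, st.2.1 ++ [(nx, ny)], st.2.2 ++ [intAt (cellA st.1 nx ny)])

-- A's 'while queue' loop; the fuel only makes the recursion structural (never exhausted: the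
-- queue empties after at most 1 + number-of-marked-cells ≤ 1 + h*w dequeues)
def bfsLoop (h w : Int) : Nat → List (List Char) × List (Int × Int) × List Int →
    List (List Char) × List Int
  | 0, (g, _, cnt) => (g, cnt)
  | _ + 1, (g, [], cnt) => (g, cnt)
  | fuel + 1, (g, (x, y) :: q, cnt) =>
      bfsLoop h w fuel
        (bfsVisit h w (bfsVisit h w (bfsVisit h w (bfsVisit h w (g, q, cnt) (x - 1) y)
          (x + 1) y) x (y - 1)) x (y + 1))

-- A's bfs(x, y): returns (mutated grid, cnt after the 'len(cnt) != 1' slice)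
def bfsA (h w : Int) (g : List (List Char)) (x y : Int) : List (List Char) × List Int :=
  let cnt0 := if cellA g x y ≠ 'X' then [intAt (cellA g x y)] else []
  let r := bfsLoop h w (2 * (h.toNat * w.toNat) + 2) (g, [(x, y)], cnt0)
  (r.1, if r.2.length ≠ 1 then r.2.drop 1 else r.2)

def solution (maps : List String) : List Int :=
  let g0 := maps.map String.toList
  let h : Int := g0.length
  let w : Int := (g0.getD 0 []).length
  let r := (PySem.List.pyRange 0 h 1).foldl (fun (st : List (List Char) × List Int) i =>
      (PySem.List.pyRange 0 w 1).foldl (fun st j =>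
        if cellA st.1 i j ≠ 'X' then
          let b := bfsA h w st.1 i j
          (b.1, st.2 ++ [b.2.sum])       -- 'if b != 0' is always true (a list is never 0)
        else st) st) (g0, [])
  let ans := PySem.List.sorted r.2 (fun x => x) false
  if ans.length = 0 then [-1] else ans

-- ===== PORT B =====

-- maps[x][y] read on the original, un-mutated strings (B never writes to the grid)
def cellB (maps : List String) (x y : Int) : Char := ((maps.getD x.toNat "").toList).getD y.toNat 'X'

-- the label grid: one Option Int per cell (None for 'X')
def labAt (L : List (List (Option Int))) (x y : Int) : Option Int :=
  (L.getD x.toNat []).getD y.toNat none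

def setLab (L : List (List (Option Int))) (x y v : Int) : List (List (Option Int)) :=
  L.set x.toNat ((L.getD x.toNat []).set y.toNat (some v))

-- the four neighbour coordinates ((x-1,y),(x+1,y),(x,y-1),(x,y+1))
def nbrList (x y : Int) : List (Int × Int) := [(x - 1, y), (x + 1, y), (x, y - 1), (x, y + 1)]

-- B's inner 'for ni, nj in …' min computation
def nbrMin (h w : Int) (L : List (List (Option Int))) (m0 x y : Int) : Int :=
  (nbrList x y).foldl (fun (m : Int) (p : Int × Int) =>
    if 0 ≤ p.1 ∧ p.1 < h ∧ 0 ≤ p.2 ∧ p.2 < w then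
      match labAt L p.1 p.2 with
      | some v => if v < m then v else m
      | none => m
    else m) m0

-- one full sweep of B's 'for i … for j …' relabelling pass; the Bool is 'changed'
def sweep (h w : Int) (st : List (List (Option Int)) × Bool) : List (List (Option Int)) × Bool :=
  (PySem.List.pyRange 0 h 1).foldl (fun st i =>
    (PySem.List.pyRange 0 w 1).foldl (fun st j =>
      match labAt st.1 i j with
      | none => st
      | some cur =>
        let m := nbrMin h w st.1 cur i j
        if m < cur then (setLab st.1 i j m, true) else st) st) st

-- B's 'while changed' loop; the fuel only makes the recursion structural (never exhausted:
-- each changing sweep strictly decreases the sum of the labels, which starts below (h*w)^2)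
def sweepLoop (h w : Int) : Nat → List (List (Option Int)) → List (List (Option Int))
  | 0, L => L
  | fuel + 1, L =>
      let r := sweep h w (L, false)
      if r.2 then sweepLoop h w fuel r.1 else r.1

def solution_alt (maps : List String) : List Int :=
  let h : Int := maps.length
  let w : Int := if maps.isEmpty then 0 else ((maps.headD "").toList.length : Int)
  let L0 : List (List (Option Int)) := (PySem.List.pyRange 0 h 1).map (fun i =>
      (PySem.List.pyRange 0 w 1).map (fun j =>
        if cellB maps i j ≠ 'X' then some (i * w + j) else none))
  let L := sweepLoop h w (h.toNat * w.toNat * (h.toNat * w.toNat) + 1) L0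
  let d := (PySem.List.pyRange 0 h 1).foldl (fun (d : PySem.Dict Int Int) i =>
      (PySem.List.pyRange 0 w 1).foldl (fun d j =>
        match labAt L i j with
        | none => d
        | some k => d.insert k (d.getD k 0 + intAt (cellB maps i j))) d) PySem.Dict.empty
  let ans := PySem.List.sorted (PySem.Dict.values d) (fun x => x) false
  if ans = [] then [-1] else ans

-- ===== PRECONDITION & SPEC =====

-- Pre_ admits exactly the inputs on which A returns: every row at least as long as row 0, and
-- within row 0's width every character 'X' or a decimal digit (otherwise A raises IndexError /
-- ValueError; columns beyond row 0's width are never read).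
def Pre_solution (maps : List String) : Prop :=
  ∀ s ∈ maps, (maps.headD "").toList.length ≤ s.toList.length ∧
    ∀ j < (maps.headD "").toList.length, s.toList.getD j 'X' = 'X' ∨
      ('0' ≤ s.toList.getD j 'X' ∧ s.toList.getD j 'X' ≤ '9')
instance (maps : List String) : Decidable (Pre_solution maps) := by
  unfold Pre_solution; infer_instance

def pvWitness_solution : List String := ["19X", "X2X"]

def Spec_solution (maps : List String) (out : List Int) : Prop := out = solution_alt maps
instance (maps : List String) (out : List Int) : Decidable (Spec_solution maps out) := by
  unfold Spec_solution; infer_instance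

-- ===== CLAIM (what is proved, stated in full; the proofs are below) =====
def Claim_equal_solution : Prop :=
  ∀ (maps : List String), Dom_solution maps → Pre_solution maps → Spec_solution maps (solution maps)

-- ===== LEMMAS AND PROOFS =====


-- proof-layer definitions
def H (maps : List String) : Int := (maps.length : Int)
def W (maps : List String) : Int := ((maps.headD "").toList.length : Int)
def pv (maps : List String) (c : Int × Int) : Char := cellB maps c.1 c.2
def iv (maps : List String) (c : Int × Int) : Int := intAt (pv maps c)
def inb (maps : List String) (c : Int × Int) : Prop :=
  0 ≤ c.1 ∧ c.1 < H maps ∧ 0 ≤ c.2 ∧ c.2 < W maps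
def land (maps : List String) (c : Int × Int) : Prop := inb maps c ∧ pv maps c ≠ 'X'
def adjc (maps : List String) (c d : Int × Int) : Prop :=
  land maps c ∧ land maps d ∧
    ((d.1 = c.1 - 1 ∧ d.2 = c.2) ∨ (d.1 = c.1 + 1 ∧ d.2 = c.2) ∨
     (d.1 = c.1 ∧ d.2 = c.2 - 1) ∨ (d.1 = c.1 ∧ d.2 = c.2 + 1))
def Reach (maps : List String) : (Int × Int) → (Int × Int) → Prop :=
  Relation.ReflTransGen (adjc maps)
def cells (maps : List String) : List (Int × Int) :=
  (PySem.List.pyRange 0 (H maps) 1).flatMap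
    (fun i => (PySem.List.pyRange 0 (W maps) 1).map (fun j => (i, j)))
noncomputable def comp (maps : List String) (c : Int × Int) : Finset (Int × Int) :=
  @Finset.filter _ (fun d => Reach maps c d) (Classical.decPred _) (cells maps).toFinset
def idx (maps : List String) (c : Int × Int) : Int := c.1 * W maps + c.2
noncomputable def compSum (maps : List String) (c : Int × Int) : Int :=
  ∑ d ∈ comp maps c, iv maps d
def isMin (maps : List String) (c : Int × Int) : Prop :=
  land maps c ∧ ∀ d ∈ comp maps c, idx maps c ≤ idx maps d

-- basic lemmas
lemma mem_cells (maps : List String) (c : Int × Int) : c ∈ cells maps ↔ inb maps c := by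
  obtain ⟨x, y⟩ := c
  simp only [cells, List.mem_flatMap, List.mem_map, PySem.List.mem_pyRange_one, inb]
  constructor
  · rintro ⟨i, hi, j, hj, he⟩
    obtain ⟨rfl, rfl⟩ : i = x ∧ j = y := by
      constructor <;> [exact congrArg Prod.fst he; exact congrArg Prod.snd he]
    exact ⟨hi.1, hi.2, hj.1, hj.2⟩
  · rintro ⟨h1, h2, h3, h4⟩; exact ⟨x, ⟨h1, h2⟩, y, ⟨h3, h4⟩, rfl⟩

lemma idx_inj (maps : List String) {c d : Int × Int} (hc : inb maps c) (hd : inb maps d)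
    (h : idx maps c = idx maps d) : c = d := by
  obtain ⟨h1, h2, h3, h4⟩ := hc
  obtain ⟨k1, k2, k3, k4⟩ := hd
  unfold idx at h
  rcases lt_trichotomy c.1 d.1 with hlt | heq | hgt
  · have : (c.1 + 1) * W maps ≤ d.1 * W maps :=
      mul_le_mul_of_nonneg_right (by omega) (by omega)
    have := this; nlinarith
  · have : c.2 = d.2 := by nlinarith
    exact Prod.ext heq this
  · have : (d.1 + 1) * W maps ≤ c.1 * W maps :=
      mul_le_mul_of_nonneg_right (by omega) (by omega)
    nlinarith

lemma pairwise_idx_cells (maps : List String) :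
    (cells maps).Pairwise (fun c d => idx maps c < idx maps d) := by
  unfold cells
  rw [List.pairwise_flatMap]
  constructor
  · intro i _
    rw [List.pairwise_map]
    apply (PySem.List.pairwise_lt_pyRange_one 0 (W maps)).imp
    intro a b hab
    simp only [idx]; omega
  · apply (PySem.List.pairwise_lt_pyRange_one 0 (H maps)).imp
    intro a b hab
    rintro x hx y hy
    simp only [List.mem_map] at hx hy
    obtain ⟨j1, hj1, rfl⟩ := hx
    obtain ⟨j2, hj2, rfl⟩ := hy
    rw [PySem.List.mem_pyRange_one] at hj1 hj2
    simp only [idx]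
    have h1 : (a + 1) * W maps ≤ b * W maps :=
      mul_le_mul_of_nonneg_right (by omega) (by omega)
    nlinarith

lemma nodup_cells (maps : List String) : (cells maps).Nodup :=
  (pairwise_idx_cells maps).imp (fun h => by intro he; subst he; omega)

lemma sum_map_const_nat (l : List Int) (k : Nat) : (l.map (fun _ => k)).sum = l.length * k := by
  induction l with
  | nil => simp
  | cons a t ih => simp; ring

lemma length_cells (maps : List String) :
    (cells maps).length = (H maps).toNat * (W maps).toNat := by
  simp only [cells, List.length_flatMap, List.length_map, PySem.List.length_pyRange_one]
  rw [show (fun i : Int => (W maps - 0).toNat) = (fun _ : Int => (W maps).toNat) by simp]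
  rw [sum_map_const_nat, PySem.List.length_pyRange_one]
  simp

lemma adj_symm (maps : List String) {c d : Int × Int} (h : adjc maps c d) : adjc maps d c := by
  obtain ⟨hc, hd, ho⟩ := h
  exact ⟨hd, hc, by omega⟩

lemma adj_ne (maps : List String) {c d : Int × Int} (h : adjc maps c d) : d ≠ c := by
  obtain ⟨hc, hd, ho⟩ := h
  intro he; subst he; omega

lemma reach_symm (maps : List String) {c d : Int × Int} (h : Reach maps c d) : Reach maps d c :=
  (Relation.ReflTransGen.symmetric (fun _ _ hab => adj_symm maps hab)) h

lemma land_of_reach (maps : List String) {c d : Int × Int} (hc : land maps c)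
    (h : Reach maps c d) : land maps d := by
  induction h with
  | refl => exact hc
  | tail _ hab ih => exact hab.2.1

lemma reach_closed (maps : List String) {P : Int × Int → Prop}
    (hP : ∀ a b, P a → adjc maps a b → P b) {c d : Int × Int} (hc : P c)
    (h : Reach maps c d) : P d := by
  induction h with
  | refl => exact hc
  | tail _ hab ih => exact hP _ _ ih hab

lemma mem_comp (maps : List String) {c d : Int × Int} (hc : land maps c) :
    d ∈ comp maps c ↔ Reach maps c d := by
  unfold comp
  rw [@Finset.mem_filter _ _ (Classical.decPred _)]
  constructor
  · exact fun h => h.2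
  · intro h
    exact ⟨by rw [List.mem_toFinset, mem_cells]; exact (land_of_reach maps hc h).1, h⟩

lemma comp_congr (maps : List String) {c d : Int × Int} (hc : land maps c)
    (h : Reach maps c d) : comp maps c = comp maps d := by
  have hd : land maps d := land_of_reach maps hc h
  ext e
  rw [mem_comp maps hc, mem_comp maps hd]
  exact ⟨fun he => ((reach_symm maps h).trans he), fun he => h.trans he⟩

lemma self_mem_comp (maps : List String) {c : Int × Int} (hc : land maps c) :
    c ∈ comp maps c := (mem_comp maps hc).mpr .refl

lemma exists_min (maps : List String) {c : Int × Int} (hc : land maps c) :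
    ∃ m ∈ comp maps c, isMin maps m := by
  obtain ⟨m, hm, hmin⟩ := Finset.exists_min_image (comp maps c) (idx maps)
    ⟨c, self_mem_comp maps hc⟩
  have hrm : Reach maps c m := (mem_comp maps hc).mp hm
  have hlm : land maps m := land_of_reach maps hc hrm
  refine ⟨m, hm, hlm, fun d hd => hmin d ?_⟩
  have he := comp_congr maps hc hrm
  exact he ▸ hd

lemma min_unique (maps : List String) {m m' : Int × Int} (h1 : isMin maps m)
    (h2 : isMin maps m') (hr : Reach maps m m') : m = m' := by
  have hm' : m' ∈ comp maps m := (mem_comp maps h1.1).mpr hr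
  have hm : m ∈ comp maps m' := (mem_comp maps h2.1).mpr (reach_symm maps hr)
  exact idx_inj maps h1.1.1 h2.1.1 (le_antisymm (h1.2 _ hm') (h2.2 _ hm))

-- getD/set helper
lemma getD_set_list {α : Type} (l : List α) (n m : Nat) (a : α) (d : α) :
    (l.set n a).getD m d = if m = n ∧ n < l.length then a else l.getD m d := by
  by_cases h : m = n ∧ n < l.length
  · obtain ⟨rfl, h2⟩ := h
    simp [List.getD_eq_getElem?_getD, List.getElem?_set_self, h2]
  · rw [if_neg h]
    rcases eq_or_ne m n with rfl | hne
    · have h2 : ¬ m < l.length := fun hh => h ⟨rfl, hh⟩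
      rw [List.set_eq_of_length_le (by omega)]
    · simp [List.getD_eq_getElem?_getD, List.getElem?_set_ne (fun hh => hne hh.symm)]

def GridRep (maps : List String) (g : List (List Char)) (S : Finset (Int × Int)) : Prop :=
  g.length = maps.length ∧
  (∀ r : Nat, (g.getD r []).length = ((maps.getD r "").toList).length) ∧
  ∀ c : Int × Int, inb maps c → cellA g c.1 c.2 = if c ∈ S then 'X' else pv maps c

def RowsOk (maps : List String) : Prop :=
  ∀ r : Nat, r < maps.length → (W maps).toNat ≤ ((maps.getD r "").toList).length

lemma map_toList_getD (maps : List String) (r : Nat) :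
    (maps.map String.toList).getD r [] = (maps.getD r "").toList := by
  rcases Nat.lt_or_ge r maps.length with h | h
  · simp [List.getD_eq_getElem?_getD, List.getElem?_map, h, List.getElem?_eq_getElem]
  · rw [List.getD_eq_default _ _ (by simpa using h), List.getD_eq_default _ _ h]
    simp

lemma gridRep_init (maps : List String) : GridRep maps (maps.map String.toList) ∅ := by
  refine ⟨by simp, fun r => by rw [map_toList_getD], ?_⟩
  intro c hc
  simp only [Finset.notMem_empty, if_false]
  unfold cellA pv cellB
  rw [map_toList_getD]

lemma gridRep_cell (maps : List String) {g : List (List Char)} {S : Finset (Int × Int)}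
    (hg : GridRep maps g S) {c : Int × Int} (hc : inb maps c) :
    cellA g c.1 c.2 = if c ∈ S then 'X' else pv maps c := hg.2.2 c hc

lemma gridRep_setX (maps : List String) {g : List (List Char)} {S : Finset (Int × Int)}
    (hrow : RowsOk maps) (hg : GridRep maps g S) {c : Int × Int} (hc : inb maps c) :
    GridRep maps (setX g c.1 c.2) (insert c S) := by
  obtain ⟨hlen, hrl, hcell⟩ := hg
  obtain ⟨h1, h2, h3, h4⟩ := hc
  have hn : c.1.toNat < g.length := by rw [hlen]; unfold H at h2; omega
  have hrowlen : c.2.toNat < (g.getD c.1.toNat []).length := by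
    rw [hrl]
    have := hrow c.1.toNat (by rw [← hlen]; exact hn)
    omega
  refine ⟨by simpa [setX] using hlen, ?_, ?_⟩
  · intro r
    unfold setX
    rw [getD_set_list]
    split
    · next h => rw [← h.1, List.length_set, hrl]
    · exact hrl r
  · intro d hd
    have hdin := hd
    obtain ⟨k1, k2, k3, k4⟩ := hd
    unfold setX cellA
    rw [getD_set_list]
    by_cases hr : d.1.toNat = c.1.toNat
    · rw [if_pos ⟨hr, hn⟩, getD_set_list]
      have hrow1 : d.1 = c.1 := by omega
      by_cases hk : d.2.toNat = c.2.toNat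
      · have : d = c := by
          obtain ⟨a, b⟩ := d; obtain ⟨a', b'⟩ := c
          simp only [Prod.mk.injEq]
          simp only at *
          omega
        subst this
        rw [if_pos ⟨hk, hrowlen⟩, if_pos (Finset.mem_insert_self _ _)]
      · rw [if_neg (fun hh => hk hh.1)]
        have hne : d ≠ c := fun hh => hk (by rw [hh])
        have := hcell d hdin
        unfold cellA at this
        rw [hr] at this
        rw [this]
        simp [Finset.mem_insert, hne]
    · rw [if_neg (fun hh => hr hh.1)]
      have hne : d ≠ c := fun hh => hr (by rw [hh])
      have := hcell d hdin
      unfold cellA at this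
      rw [this]
      simp [Finset.mem_insert, hne]

-- BFS state invariants
def CntShape (maps : List String) (s : Int × Int) (cnt : List Int) (M : Finset (Int × Int)) : Prop :=
  ∃ rest, cnt = iv maps s :: rest ∧ rest.length = M.card ∧ rest.sum = ∑ d ∈ M, iv maps d

def VInv (maps : List String) (s : Int × Int) (S M : Finset (Int × Int))
    (st : List (List Char) × List (Int × Int) × List Int) : Prop :=
  GridRep maps st.1 (S ∪ M) ∧ M ⊆ comp maps s ∧ (∀ c ∈ M, ∃ d, adjc maps c d) ∧
  (∀ c ∈ st.2.1, c ∈ insert s M) ∧ CntShape maps s st.2.2 M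

def ClosedQ (maps : List String) (s : Int × Int) (q : List (Int × Int))
    (M : Finset (Int × Int)) : Prop :=
  ∀ c ∈ insert s M, c ∉ q → ∀ d, adjc maps c d → d ∈ M

lemma mem_comp_of_insert (maps : List String) {s x : Int × Int} {M : Finset (Int × Int)}
    (hs : land maps s) (hM : M ⊆ comp maps s) (hx : x ∈ insert s M) : x ∈ comp maps s := by
  rcases Finset.mem_insert.mp hx with rfl | h
  · exact self_mem_comp maps hs
  · exact hM h

lemma visit_step (maps : List String) {s x : Int × Int} {S M : Finset (Int × Int)}
    {st : List (List Char) × List (Int × Int) × List Int}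
    (hrow : RowsOk maps) (hdisj : Disjoint S (comp maps s)) (hs : land maps s)
    (hx : x ∈ insert s M) (hM : VInv maps s S M st) (nx ny : Int)
    (hadj : land maps (nx, ny) → adjc maps x (nx, ny)) :
    ∃ M', M ⊆ M' ∧ VInv maps s S M' (bfsVisit (H maps) (W maps) st nx ny) ∧
      (adjc maps x (nx, ny) → (nx, ny) ∈ M') ∧
      (∃ app, (bfsVisit (H maps) (W maps) st nx ny).2.1 = st.2.1 ++ app ∧
        app.length + M.card = M'.card) ∧
      (∀ d ∈ M', d ∈ M ∨ d ∈ (bfsVisit (H maps) (W maps) st nx ny).2.1) := by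
  obtain ⟨g, q, cnt⟩ := st
  obtain ⟨hgrid, hsub, hnbr, hq, hcnt⟩ := hM
  simp only at hgrid hq hcnt ⊢
  have hxc : x ∈ comp maps s := mem_comp_of_insert maps hs hsub hx
  have hxreach : Reach maps s x := (mem_comp maps hs).mp hxc
  unfold bfsVisit
  by_cases hb : nx < 0 ∨ H maps ≤ nx ∨ ny < 0 ∨ W maps ≤ ny
  · rw [if_pos hb]
    refine ⟨M, Finset.Subset.refl _, ⟨hgrid, hsub, hnbr, hq, hcnt⟩, ?_, ⟨[], by simp, by simp⟩,
      fun d hd => Or.inl hd⟩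
    intro ha
    have hi := ha.2.1.1
    unfold inb at hi
    simp only at hi
    omega
  · rw [if_neg hb]
    have hinb : inb maps (nx, ny) := by unfold inb; simp only; omega
    have hcellA := gridRep_cell maps hgrid hinb
    by_cases hX : cellA g nx ny = 'X'
    · rw [if_pos hX]
      refine ⟨M, Finset.Subset.refl _, ⟨hgrid, hsub, hnbr, hq, hcnt⟩, ?_, ⟨[], by simp, by simp⟩,
        fun d hd => Or.inl hd⟩
      intro ha
      have hland : land maps (nx, ny) := ha.2.1
      rw [hcellA] at hX
      by_cases hmem : (nx, ny) ∈ S ∪ M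
      · rcases Finset.mem_union.mp hmem with hS | hM2
        · exfalso
          have : (nx, ny) ∈ comp maps s :=
            (mem_comp maps hs).mpr (hxreach.tail ha)
          exact Finset.disjoint_left.mp hdisj hS this
        · exact hM2
      · rw [if_neg hmem] at hX
        exact absurd hX hland.2
    · rw [if_neg hX]
      have hnotmem : (nx, ny) ∉ S ∪ M := by
        intro hmem
        rw [hcellA, if_pos hmem] at hX
        exact hX rfl
      have hpv : pv maps (nx, ny) ≠ 'X' := by
        rw [hcellA, if_neg hnotmem] at hX
        exact hX
      have hland : land maps (nx, ny) := ⟨hinb, hpv⟩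
      have ha : adjc maps x (nx, ny) := hadj hland
      have hreach : Reach maps s (nx, ny) := hxreach.tail ha
      have hcm : (nx, ny) ∈ comp maps s := (mem_comp maps hs).mpr hreach
      have hnM : (nx, ny) ∉ M := fun h => hnotmem (Finset.mem_union_right _ h)
      refine ⟨insert (nx, ny) M, Finset.subset_insert _ _, ?_, fun _ => Finset.mem_insert_self _ _,
        ⟨[(nx, ny)], by simp, ?_⟩, ?_⟩
      · refine ⟨?_, ?_, ?_, ?_, ?_⟩
        · have := gridRep_setX maps hrow hgrid hinb
          simpa [Finset.insert_union, Finset.union_insert] using this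
        · intro d hd
          rcases Finset.mem_insert.mp hd with rfl | hd2
          · exact hcm
          · exact hsub hd2
        · intro d hd
          rcases Finset.mem_insert.mp hd with rfl | hd2
          · exact ⟨x, adj_symm maps ha⟩
          · exact hnbr d hd2
        · intro d hd
          simp only [List.mem_append, List.mem_singleton] at hd
          rcases hd with hd | rfl
          · rcases Finset.mem_insert.mp (hq d hd) with rfl | h
            · exact Finset.mem_insert_self _ _
            · exact Finset.mem_insert_of_mem (Finset.mem_insert_of_mem h)
          · exact Finset.mem_insert_of_mem (Finset.mem_insert_self _ _)
        · obtain ⟨rest, hr1, hr2, hr3⟩ := hcnt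
          refine ⟨rest ++ [intAt (cellA g nx ny)], by rw [hr1]; simp, ?_, ?_⟩
          · rw [List.length_append, hr2, Finset.card_insert_of_notMem hnM]; simp
          · have hval : intAt (cellA g nx ny) = iv maps (nx, ny) := by
              rw [hcellA, if_neg hnotmem]; rfl
            rw [List.sum_append, hr3, Finset.sum_insert hnM, hval]; simp; ring
      · simp [Finset.card_insert_of_notMem hnM]; omega
      · intro d hd
        rcases Finset.mem_insert.mp hd with rfl | hd2
        · exact Or.inr (by simp)
        · exact Or.inl hd2

lemma adj_offsets (maps : List String) {x d : Int × Int} (h : adjc maps x d) :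
    d = (x.1 - 1, x.2) ∨ d = (x.1 + 1, x.2) ∨ d = (x.1, x.2 - 1) ∨ d = (x.1, x.2 + 1) := by
  obtain ⟨a, b⟩ := d
  obtain ⟨-, -, ho⟩ := h
  simp only [Prod.mk.injEq]
  simp only at ho
  omega

lemma land_of_mem_comp (maps : List String) {s d : Int × Int} (hs : land maps s)
    (hd : d ∈ comp maps s) : land maps d :=
  land_of_reach maps hs ((mem_comp maps hs).mp hd)

set_option maxHeartbeats 2000000 in
lemma process_cell (maps : List String) {s : Int × Int} {x y : Int} {S M : Finset (Int × Int)}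
    {g : List (List Char)} {q : List (Int × Int)} {cnt : List Int}
    (hrow : RowsOk maps) (hdisj : Disjoint S (comp maps s)) (hs : land maps s)
    (hM : VInv maps s S M (g, (x, y) :: q, cnt)) (hcl : ClosedQ maps s ((x, y) :: q) M) :
    ∃ M', M ⊆ M' ∧
      VInv maps s S M'
        (bfsVisit (H maps) (W maps) (bfsVisit (H maps) (W maps) (bfsVisit (H maps) (W maps)
          (bfsVisit (H maps) (W maps) (g, q, cnt) (x - 1) y) (x + 1) y) x (y - 1))
          x (y + 1)) ∧
      ClosedQ maps s
        (bfsVisit (H maps) (W maps) (bfsVisit (H maps) (W maps) (bfsVisit (H maps) (W maps)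
          (bfsVisit (H maps) (W maps) (g, q, cnt) (x - 1) y) (x + 1) y) x (y - 1))
          x (y + 1)).2.1 M' ∧
      (bfsVisit (H maps) (W maps) (bfsVisit (H maps) (W maps) (bfsVisit (H maps) (W maps)
          (bfsVisit (H maps) (W maps) (g, q, cnt) (x - 1) y) (x + 1) y) x (y - 1))
          x (y + 1)).2.1.length + 2 * ((comp maps s).card - M'.card) + 1 ≤
        ((x, y) :: q).length + 2 * ((comp maps s).card - M.card) := by
  have hx : (x, y) ∈ insert s M := hM.2.2.2.1 (x, y) (by simp)
  have hxc : (x, y) ∈ comp maps s := mem_comp_of_insert maps hs hM.2.1 hx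
  have hlx : land maps (x, y) := land_of_mem_comp maps hs hxc
  have hinv0 : VInv maps s S M (g, q, cnt) :=
    ⟨hM.1, hM.2.1, hM.2.2.1, fun c hc => hM.2.2.2.1 c (by simp [hc]), hM.2.2.2.2⟩
  have V1 := visit_step maps hrow hdisj hs hx hinv0 (x - 1) y (fun hl => ⟨hlx, hl, by simp⟩)
  generalize h1 : bfsVisit (H maps) (W maps) (g, q, cnt) (x - 1) y = st1 at V1 ⊢
  obtain ⟨M1, hm01, hinv1, hadj1, ⟨a1, ha1, hc1⟩, hfresh1⟩ := V1
  have hx1 : (x, y) ∈ insert s M1 := Finset.insert_subset_insert _ hm01 hx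
  have V2 := visit_step maps hrow hdisj hs hx1 hinv1 (x + 1) y (fun hl => ⟨hlx, hl, by simp⟩)
  generalize h2 : bfsVisit (H maps) (W maps) st1 (x + 1) y = st2 at V2 ⊢
  obtain ⟨M2, hm12, hinv2, hadj2, ⟨a2, ha2, hc2⟩, hfresh2⟩ := V2
  have hx2 : (x, y) ∈ insert s M2 := Finset.insert_subset_insert _ hm12 hx1
  have V3 := visit_step maps hrow hdisj hs hx2 hinv2 x (y - 1) (fun hl => ⟨hlx, hl, by simp⟩)
  generalize h3 : bfsVisit (H maps) (W maps) st2 x (y - 1) = st3 at V3 ⊢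
  obtain ⟨M3, hm23, hinv3, hadj3, ⟨a3, ha3, hc3⟩, hfresh3⟩ := V3
  have hx3 : (x, y) ∈ insert s M3 := Finset.insert_subset_insert _ hm23 hx2
  have V4 := visit_step maps hrow hdisj hs hx3 hinv3 x (y + 1) (fun hl => ⟨hlx, hl, by simp⟩)
  generalize h4 : bfsVisit (H maps) (W maps) st3 x (y + 1) = st4 at V4 ⊢
  obtain ⟨M4, hm34, hinv4, hadj4, ⟨a4, ha4, hc4⟩, hfresh4⟩ := V4
  have hm04 : M ⊆ M4 := (hm01.trans hm12).trans (hm23.trans hm34)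
  have hm14 : M1 ⊆ M4 := hm12.trans (hm23.trans hm34)
  have hm24 : M2 ⊆ M4 := hm23.trans hm34
  refine ⟨M4, hm04, hinv4, ?_, ?_⟩
  · -- closure
    intro c hcmem hcq d hcd
    have hqsub : ∀ e : Int × Int, e ∈ q → e ∈ st4.2.1 := by
      intro e he
      rw [ha4, ha3, ha2, ha1]
      simp only [List.mem_append]
      tauto
    have hold : c ∈ insert s M := by
      rcases Finset.mem_insert.mp hcmem with rfl | h4
      · exact Finset.mem_insert_self _ _
      · rcases hfresh4 c h4 with h3' | hq4
        · rcases hfresh3 c h3' with h2' | hq3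
          · rcases hfresh2 c h2' with h1' | hq2
            · rcases hfresh1 c h1' with h0' | hq1
              · exact Finset.mem_insert_of_mem h0'
              · exact absurd (by rw [ha4, ha3, ha2]; simp only [List.mem_append]; tauto) hcq
            · exact absurd (by rw [ha4, ha3]; simp only [List.mem_append]; tauto) hcq
          · exact absurd (by rw [ha4]; simp only [List.mem_append]; tauto) hcq
        · exact absurd hq4 hcq
    by_cases hcx : c = (x, y)
    · subst hcx
      rcases adj_offsets maps hcd with rfl | rfl | rfl | rfl
      · exact hm14 (hadj1 hcd)
      · exact hm24 (hadj2 hcd)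
      · exact hm34 (hadj3 hcd)
      · exact hadj4 hcd
    · have hnotxq : c ∉ (x, y) :: q := by
        intro hmem
        rcases List.mem_cons.mp hmem with rfl | hmem2
        · exact hcx rfl
        · exact hcq (hqsub c hmem2)
      exact hm04 (hcl c hold hnotxq d hcd)
  · -- measure
    rw [ha4, ha3, ha2, ha1]
    have hK4 := Finset.card_le_card (hinv4.2.1)
    have hs1 := Finset.card_le_card hm01
    have hs2 := Finset.card_le_card hm12
    have hs3 := Finset.card_le_card hm23
    have hs4 := Finset.card_le_card hm34
    simp only [List.length_append, List.length_cons]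
    omega

set_option maxHeartbeats 2000000 in
lemma bfsLoop_run (maps : List String) {s : Int × Int} {S : Finset (Int × Int)}
    (hrow : RowsOk maps) (hdisj : Disjoint S (comp maps s)) (hs : land maps s) :
    ∀ (fuel : Nat) (st : List (List Char) × List (Int × Int) × List Int)
      (M : Finset (Int × Int)), VInv maps s S M st → ClosedQ maps s st.2.1 M →
      st.2.1.length + 2 * ((comp maps s).card - M.card) ≤ fuel →
      ∃ Mf, M ⊆ Mf ∧ Mf ⊆ comp maps s ∧ (∀ c ∈ Mf, ∃ d, adjc maps c d) ∧
        GridRep maps (bfsLoop (H maps) (W maps) fuel st).1 (S ∪ Mf) ∧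
        CntShape maps s (bfsLoop (H maps) (W maps) fuel st).2 Mf ∧
        ClosedQ maps s [] Mf := by
  intro fuel
  induction fuel with
  | zero =>
    intro st M hinv hcl hmeas
    obtain ⟨g, q, cnt⟩ := st
    have hq : q = [] := by
      simp only at hmeas
      cases q with
      | nil => rfl
      | cons a t => simp at hmeas
    subst hq
    exact ⟨M, Finset.Subset.refl _, hinv.2.1, hinv.2.2.1, hinv.1, hinv.2.2.2.2,
      fun c hc _ d hd => hcl c hc (by simp) d hd⟩
  | succ fuel ih =>
    intro st M hinv hcl hmeas
    obtain ⟨g, q, cnt⟩ := st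
    cases q with
    | nil =>
      exact ⟨M, Finset.Subset.refl _, hinv.2.1, hinv.2.2.1, hinv.1, hinv.2.2.2.2,
        fun c hc _ d hd => hcl c hc (by simp) d hd⟩
    | cons p q' =>
      obtain ⟨x, y⟩ := p
      obtain ⟨M', hMM', hinv', hcl', hmeas'⟩ := process_cell maps hrow hdisj hs hinv hcl
      show ∃ Mf, M ⊆ Mf ∧ _
      have hstep : bfsLoop (H maps) (W maps) (fuel + 1) (g, (x, y) :: q', cnt) =
          bfsLoop (H maps) (W maps) fuel
            (bfsVisit (H maps) (W maps) (bfsVisit (H maps) (W maps) (bfsVisit (H maps) (W maps)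
              (bfsVisit (H maps) (W maps) (g, q', cnt) (x - 1) y) (x + 1) y) x (y - 1))
              x (y + 1)) := rfl
      rw [hstep]
      obtain ⟨Mf, h1, h2, h3, h4, h5, h6⟩ :=
        ih _ M' hinv' hcl' (by
          have := hmeas'
          simp only [List.length_cons] at hmeas this ⊢
          omega)
      exact ⟨Mf, hMM'.trans h1, h2, h3, h4, h5, h6⟩

noncomputable def compMark (maps : List String) (s : Int × Int) : Finset (Int × Int) :=
  if 2 ≤ (comp maps s).card then comp maps s else ∅

lemma first_step (maps : List String) {s d : Int × Int} (hr : Reach maps s d) :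
    d ≠ s → ∃ e, adjc maps s e := by
  induction hr with
  | refl => exact fun hne => absurd rfl hne
  | tail hab hbc ih =>
    rename_i b c
    intro _
    by_cases hbs : b = s
    · subst hbs
      exact ⟨c, hbc⟩
    · exact ih hbs

set_option maxHeartbeats 1000000 in
lemma bfsA_spec (maps : List String) {s : Int × Int} {S : Finset (Int × Int)}
    {g : List (List Char)}
    (hrow : RowsOk maps) (hdisj : Disjoint S (comp maps s)) (hs : land maps s)
    (hg : GridRep maps g S) :
    (bfsA (H maps) (W maps) g s.1 s.2).2.sum = compSum maps s ∧
    GridRep maps (bfsA (H maps) (W maps) g s.1 s.2).1 (S ∪ compMark maps s) := by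
  have hsS : s ∉ S := fun h =>
    Finset.disjoint_left.mp hdisj h (self_mem_comp maps hs)
  have hcell : cellA g s.1 s.2 = pv maps s := by
    rw [gridRep_cell maps hg hs.1, if_neg hsS]
  have hcnt0 : (if cellA g s.1 s.2 ≠ 'X' then [intAt (cellA g s.1 s.2)] else [])
      = [iv maps s] := by
    rw [hcell, if_pos hs.2]; rfl
  have hinv0 : VInv maps s S ∅ (g, [(s.1, s.2)], [iv maps s]) := by
    refine ⟨by simpa using hg, by simp, by simp, ?_, ⟨[], rfl, by simp, by simp⟩⟩
    intro c hc
    simp at hc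
    simp [hc]
  have hcl0 : ClosedQ maps s [(s.1, s.2)] ∅ := by
    intro c hc hnq
    simp at hc
    subst hc
    simp at hnq
  have hcard : (comp maps s).card ≤ (H maps).toNat * (W maps).toNat := by
    calc (comp maps s).card ≤ (cells maps).toFinset.card :=
          Finset.card_le_card (@Finset.filter_subset _ (fun d => Reach maps s d) (Classical.decPred _) _)
      _ ≤ (cells maps).length := (cells maps).toFinset_card_le
      _ = (H maps).toNat * (W maps).toNat := length_cells maps
  obtain ⟨Mf, h1, h2, h3, h4, h5, h6⟩ := bfsLoop_run maps hrow hdisj hs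
    (2 * ((H maps).toNat * (W maps).toNat) + 2) (g, [(s.1, s.2)], [iv maps s]) ∅ hinv0 hcl0
    (by simp only [List.length_cons, List.length_nil]; omega)
  -- identify the component
  have hTsub : (insert s Mf : Finset (Int × Int)) ⊆ comp maps s :=
    Finset.insert_subset (self_mem_comp maps hs) h2
  have hTsup : comp maps s ⊆ insert s Mf := by
    intro d hd
    have hreach := (mem_comp maps hs).mp hd
    exact reach_closed maps (P := fun e => e ∈ insert s Mf)
      (fun a b ha hab => Finset.mem_insert_of_mem (h6 a ha (by simp) b hab))
      (Finset.mem_insert_self _ _) hreach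
  have hT : (insert s Mf : Finset (Int × Int)) = comp maps s :=
    Finset.Subset.antisymm hTsub hTsup
  obtain ⟨rest, hr1, hr2, hr3⟩ := h5
  unfold bfsA
  simp only [hcnt0]
  rcases Nat.lt_or_ge (comp maps s).card 2 with hsmall | hbig
  · -- singleton component
    have hcomp1 : comp maps s = {s} := by
      have h1c : ({s} : Finset (Int × Int)) ⊆ comp maps s := by
        simp [self_mem_comp maps hs]
      have hcard1 : (comp maps s).card ≤ 1 := by omega
      have := Finset.eq_of_subset_of_card_le h1c (by simpa using hcard1)
      exact this.symm
    have hMfempty : Mf = ∅ := by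
      rw [hcomp1] at h2
      rcases Finset.subset_singleton_iff.mp h2 with he | he
      · exact he
      · exfalso
        have hsMf : s ∈ Mf := by rw [he]; exact Finset.mem_singleton_self _
        obtain ⟨d, hd⟩ := h3 s hsMf
        have hdc : d ∈ comp maps s := (mem_comp maps hs).mpr (Relation.ReflTransGen.single hd)
        rw [hcomp1] at hdc
        have : d = s := Finset.mem_singleton.mp hdc
        exact adj_ne maps hd this
    subst hMfempty
    have hrest : rest = [] := List.eq_nil_of_length_eq_zero (by simp [hr2])
    subst hrest
    rw [hr1]
    constructor
    · simp [compSum, hcomp1]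
    · have hcm : compMark maps s = ∅ := by rw [compMark, if_neg (by omega)]
      rw [hcm]
      simpa using h4
  · -- multi-cell component
    have hsMf : s ∈ Mf := by
      obtain ⟨d, hd, hdne⟩ := Finset.exists_mem_ne (s := comp maps s) (by omega) s
      obtain ⟨e, he⟩ := first_step maps ((mem_comp maps hs).mp hd) hdne
      have heMf : e ∈ Mf := h6 s (Finset.mem_insert_self _ _) (by simp) e he
      exact h6 e (Finset.mem_insert_of_mem heMf) (by simp) s (adj_symm maps he)
    have hMfcomp : Mf = comp maps s := by
      rw [← hT, Finset.insert_eq_self.mpr hsMf]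
    have hlen : rest.length = (comp maps s).card := by rw [hr2, hMfcomp]
    rw [hr1]
    have hlenne : (iv maps s :: rest).length ≠ 1 := by
      simp only [List.length_cons]
      rw [hr2, hMfcomp]
      omega
    rw [if_pos hlenne]
    constructor
    · simp only [List.drop_one, List.tail_cons]
      rw [hr3, hMfcomp, compSum]
    · rw [compMark, if_pos hbig, ← hMfcomp]
      exact h4

lemma foldl_flatMap_eq {α β γ : Type} (l : List α) (f : α → List β) (g : γ → β → γ)
    (init : γ) : (l.flatMap f).foldl g init = l.foldl (fun acc a => (f a).foldl g acc) init := by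
  induction l generalizing init with
  | nil => rfl
  | cons a t ih => rw [List.flatMap_cons, List.foldl_append, ih, List.foldl_cons]

def bodyA (maps : List String) (st : List (List Char) × List Int) (c : Int × Int) :
    List (List Char) × List Int :=
  if cellA st.1 c.1 c.2 ≠ 'X' then
    ((bfsA (H maps) (W maps) st.1 c.1 c.2).1,
      st.2 ++ [(bfsA (H maps) (W maps) st.1 c.1 c.2).2.sum])
  else st

noncomputable def minsSums (maps : List String) : List (Int × Int) → List Int
  | [] => []
  | c :: t =>
      @ite _ (isMin maps c) (Classical.propDecidable _)
        (compSum maps c :: minsSums maps t) (minsSums maps t)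

noncomputable def Spref (maps : List String) (pref : List (Int × Int)) : Finset (Int × Int) :=
  @Finset.filter _
    (fun d => land maps d ∧ 2 ≤ (comp maps d).card ∧
      ∃ m ∈ pref, m ∈ comp maps d ∧ isMin maps m)
    (Classical.decPred _) (cells maps).toFinset

lemma mem_Spref (maps : List String) (pref : List (Int × Int)) (d : Int × Int) :
    d ∈ Spref maps pref ↔ land maps d ∧ 2 ≤ (comp maps d).card ∧
      ∃ m ∈ pref, m ∈ comp maps d ∧ isMin maps m := by
  unfold Spref
  rw [@Finset.mem_filter _ _ (Classical.decPred _)]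
  constructor
  · exact fun h => h.2
  · intro h
    exact ⟨by rw [List.mem_toFinset, mem_cells]; exact h.1.1, h⟩

lemma Spref_skip (maps : List String) (pref : List (Int × Int)) {p : Int × Int}
    (hp : ¬ isMin maps p) : Spref maps (pref ++ [p]) = Spref maps pref := by
  ext d
  rw [mem_Spref, mem_Spref]
  constructor
  · rintro ⟨h1, h2, m, hm, h3, h4⟩
    rcases List.mem_append.mp hm with hm' | hm'
    · exact ⟨h1, h2, m, hm', h3, h4⟩
    · rw [List.mem_singleton] at hm'
      subst hm'
      exact absurd h4 hp
  · rintro ⟨h1, h2, m, hm, h3, h4⟩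
    exact ⟨h1, h2, m, List.mem_append_left _ hm, h3, h4⟩

lemma Spref_step (maps : List String) (pref : List (Int × Int)) {p : Int × Int}
    (hp : isMin maps p) :
    Spref maps (pref ++ [p]) = Spref maps pref ∪ compMark maps p := by
  ext d
  rw [Finset.mem_union, mem_Spref, mem_Spref]
  constructor
  · rintro ⟨h1, h2, m, hm, h3, h4⟩
    rcases List.mem_append.mp hm with hm' | hm'
    · exact Or.inl ⟨h1, h2, m, hm', h3, h4⟩
    · rw [List.mem_singleton] at hm'
      rw [hm'] at h3 h4
      right
      have hdp : d ∈ comp maps p := by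
        rw [mem_comp maps hp.1]
        exact reach_symm maps ((mem_comp maps h1).mp h3)
      rw [compMark, if_pos ?_]
      · exact hdp
      · have : comp maps d = comp maps p :=
          comp_congr maps h1 ((mem_comp maps h1).mp h3)
        rw [← this]; exact h2
  · rintro (⟨h1, h2, m, hm, h3, h4⟩ | hd)
    · exact ⟨h1, h2, m, List.mem_append_left _ hm, h3, h4⟩
    · rw [compMark] at hd
      split at hd
      · next hbig =>
        have hld : land maps d := land_of_mem_comp maps hp.1 hd
        have hcc : comp maps d = comp maps p :=
          (comp_congr maps hp.1 ((mem_comp maps hp.1).mp hd)).symm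
        refine ⟨hld, by rw [hcc]; exact hbig, p, List.mem_append_right _ (by simp), ?_, hp⟩
        rw [mem_comp maps hld]
        exact reach_symm maps ((mem_comp maps hp.1).mp hd)
      · simp at hd

set_option maxHeartbeats 2000000 in
lemma scanA (maps : List String) (hrow : RowsOk maps) :
    ∀ (suf pref : List (Int × Int)), cells maps = pref ++ suf →
    ∀ (g : List (List Char)), GridRep maps g (Spref maps pref) → ∀ (ans : List Int),
      (suf.foldl (bodyA maps) (g, ans)).2 = ans ++ minsSums maps suf ∧
      GridRep maps (suf.foldl (bodyA maps) (g, ans)).1 (Spref maps (pref ++ suf)) := by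
  intro suf
  induction suf with
  | nil =>
    intro pref hsplit g hg ans
    exact ⟨by simp [minsSums], by simpa using hg⟩
  | cons p suf' ih =>
    intro pref hsplit g hg ans
    have hpmem : p ∈ cells maps := by rw [hsplit]; simp
    have hpinb : inb maps p := (mem_cells maps p).mp hpmem
    have hnd := nodup_cells maps
    rw [hsplit] at hnd
    have hdisj := List.disjoint_of_nodup_append hnd
    have hpnotpref : p ∉ pref := fun h => hdisj h (by simp)
    have hcellp := gridRep_cell maps hg hpinb
    have hassoc : pref ++ p :: suf' = (pref ++ [p]) ++ suf' := by simp
    by_cases hland : land maps p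
    · by_cases hpS : p ∈ Spref maps pref
      · -- already swallowed by an earlier island: skip
        have hnotmin : ¬ isMin maps p := by
          intro hmin
          obtain ⟨-, -, m, hmpref, hmcomp, hmmin⟩ := (mem_Spref maps pref p).mp hpS
          have hreach : Reach maps p m := (mem_comp maps hland).mp hmcomp
          have : m = p := min_unique maps hmmin hmin (reach_symm maps hreach)
          subst this
          exact hpnotpref hmpref
        have hskip : bodyA maps (g, ans) p = (g, ans) := by
          unfold bodyA
          rw [hcellp, if_pos hpS]
          simp
        rw [List.foldl_cons, hskip]
        have hmins : minsSums maps (p :: suf') = minsSums maps suf' := by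
          rw [minsSums, if_neg hnotmin]
        have hg' : GridRep maps g (Spref maps (pref ++ [p])) := by
          rw [Spref_skip maps pref hnotmin]; exact hg
        obtain ⟨hh1, hh2⟩ := ih (pref ++ [p]) (by rw [hsplit, hassoc]) g hg' ans
        refine ⟨by rw [hh1, hmins], ?_⟩
        rw [hassoc]
        exact hh2
      · -- fresh island: p is its minimum, BFS swallows it
        have hcellval : cellA g p.1 p.2 = pv maps p := by rw [hcellp, if_neg hpS]
        have hmin : isMin maps p := by
          obtain ⟨m, hmcomp, hmmin⟩ := exists_min maps hland
          by_cases hmp : m = p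
          · subst hmp; exact hmmin
          · exfalso
            have hpm : p ∈ comp maps m := by
              rw [mem_comp maps hmmin.1]
              exact reach_symm maps ((mem_comp maps hland).mp hmcomp)
            have hle : idx maps m ≤ idx maps p := hmmin.2 p hpm
            have hlt : idx maps m < idx maps p := by
              rcases lt_or_eq_of_le hle with h | h
              · exact h
              · exact absurd (idx_inj maps hmmin.1.1 hpinb h) hmp
            have hmcells : m ∈ cells maps := (mem_cells maps m).mpr hmmin.1.1
            have hmpref : m ∈ pref := by
              rw [hsplit] at hmcells
              rcases List.mem_append.mp hmcells with h | h
              · exact h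
              · rcases List.mem_cons.mp h with h2 | h2
                · exact absurd h2 hmp
                · exfalso
                  have hpair := pairwise_idx_cells maps
                  rw [hsplit] at hpair
                  have := (List.pairwise_append.mp hpair).2.1
                  have := (List.pairwise_cons.mp this).1 m h2
                  omega
            have hcard : 2 ≤ (comp maps p).card := by
              refine Finset.one_lt_card.mpr ⟨m, hmcomp, p, self_mem_comp maps hland, hmp⟩
            exact hpS ((mem_Spref maps pref p).mpr
              ⟨hland, hcard, m, hmpref, hmcomp, hmmin⟩)
        have hdisjS : Disjoint (Spref maps pref) (comp maps p) := by
          rw [Finset.disjoint_left]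
          intro d hdS hdc
          obtain ⟨hld, -, m', hm'pref, hm'comp, hm'min⟩ := (mem_Spref maps pref d).mp hdS
          have hpd : Reach maps p d := (mem_comp maps hland).mp hdc
          have hdm' : Reach maps d m' := (mem_comp maps hld).mp hm'comp
          have : m' = p := min_unique maps hm'min hmin
            (reach_symm maps (hpd.trans hdm'))
          subst this
          exact hpnotpref hm'pref
        obtain ⟨hsum, hgrid'⟩ := bfsA_spec maps hrow hdisjS hland hg
        have hstep : bodyA maps (g, ans) p =
            ((bfsA (H maps) (W maps) g p.1 p.2).1, ans ++ [compSum maps p]) := by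
          unfold bodyA
          rw [hcellval, if_pos hland.2]
          simp [hsum]
        rw [List.foldl_cons, hstep]
        have hg' : GridRep maps (bfsA (H maps) (W maps) g p.1 p.2).1
            (Spref maps (pref ++ [p])) := by
          rw [Spref_step maps pref hmin]
          exact hgrid'
        obtain ⟨hh1, hh2⟩ := ih (pref ++ [p]) (by rw [hsplit, hassoc]) _ hg' (ans ++ [compSum maps p])
        refine ⟨?_, ?_⟩
        · rw [hh1, minsSums, if_pos hmin]
          simp
        · rw [hassoc]
          exact hh2
    · -- water cell: skip
      have hpvX : pv maps p = 'X' := by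
        by_cases h : pv maps p = 'X'
        · exact h
        · exact absurd ⟨hpinb, h⟩ hland
      have hnotmin : ¬ isMin maps p := fun h => hland h.1
      have hcellX : cellA g p.1 p.2 = 'X' := by
        rw [hcellp]
        split
        · rfl
        · exact hpvX
      have hskip : bodyA maps (g, ans) p = (g, ans) := by
        unfold bodyA
        rw [hcellX]
        simp
      rw [List.foldl_cons, hskip]
      have hmins : minsSums maps (p :: suf') = minsSums maps suf' := by
        rw [minsSums, if_neg hnotmin]
      have hg' : GridRep maps g (Spref maps (pref ++ [p])) := by
        rw [Spref_skip maps pref hnotmin]; exact hg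
      obtain ⟨hh1, hh2⟩ := ih (pref ++ [p]) (by rw [hsplit, hassoc]) g hg' ans
      refine ⟨by rw [hh1, hmins], ?_⟩
      rw [hassoc]
      exact hh2

lemma Spref_nil (maps : List String) : Spref maps [] = ∅ := by
  ext d
  rw [mem_Spref]
  simp

set_option maxHeartbeats 1000000 in
lemma foldA_char (maps : List String) (hrow : RowsOk maps) :
    ((PySem.List.pyRange 0 (H maps) 1).foldl
      (fun (st : List (List Char) × List Int) i =>
        (PySem.List.pyRange 0 (W maps) 1).foldl
          (fun st j =>
            if cellA st.1 i j ≠ 'X' then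
              ((bfsA (H maps) (W maps) st.1 i j).1,
                st.2 ++ [(bfsA (H maps) (W maps) st.1 i j).2.sum])
            else st) st)
      (maps.map String.toList, ([] : List Int))).2 = minsSums maps (cells maps) := by
  have hinit : GridRep maps (maps.map String.toList) (Spref maps []) := by
    rw [Spref_nil]
    exact gridRep_init maps
  have hscan := (scanA maps hrow (cells maps) [] rfl (maps.map String.toList) hinit []).1
  have hfold : ((cells maps).foldl (bodyA maps) (maps.map String.toList, ([] : List Int))) =
      ((PySem.List.pyRange 0 (H maps) 1).foldl
        (fun (st : List (List Char) × List Int) i =>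
          (PySem.List.pyRange 0 (W maps) 1).foldl
            (fun st j =>
              if cellA st.1 i j ≠ 'X' then
                ((bfsA (H maps) (W maps) st.1 i j).1,
                  st.2 ++ [(bfsA (H maps) (W maps) st.1 i j).2.sum])
              else st) st)
        (maps.map String.toList, ([] : List Int))) := by
    rw [cells, foldl_flatMap_eq]
    simp only [List.foldl_map]
    rfl
  rw [← hfold, hscan]
  simp

set_option maxHeartbeats 1000000 in
lemma solutionA_char (maps : List String) (hrow : RowsOk maps) :
    solution maps =
      (if (PySem.List.sorted (minsSums maps (cells maps)) (fun x => x) false).length = 0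
        then [-1]
        else PySem.List.sorted (minsSums maps (cells maps)) (fun x => x) false) := by
  have hlen : (((maps.map String.toList).length : Nat) : Int) = H maps := by simp [H]
  have hwid : ((((maps.map String.toList).getD 0 []).length : Nat) : Int) = W maps := by
    rw [map_toList_getD]
    cases maps with
    | nil => simp [W]
    | cons a t => simp [W]
  show (let r := ((PySem.List.pyRange 0 ((maps.map String.toList).length : Int) 1).foldl
      (fun (st : List (List Char) × List Int) i =>
        (PySem.List.pyRange 0 (((maps.map String.toList).getD 0 []).length : Int) 1).foldl
          (fun st j =>
            if cellA st.1 i j ≠ 'X' then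
              ((bfsA ((maps.map String.toList).length : Int)
                  (((maps.map String.toList).getD 0 []).length : Int) st.1 i j).1,
                st.2 ++ [(bfsA ((maps.map String.toList).length : Int)
                  (((maps.map String.toList).getD 0 []).length : Int) st.1 i j).2.sum])
            else st) st)
      (maps.map String.toList, ([] : List Int)))
    let ans := (PySem.List.sorted r.2 (fun x => x) false)
    if ans.length = 0 then [-1] else ans) = _
  simp only [hlen, hwid]
  rw [foldA_char maps hrow]

-- ===== B side: labels =====

def LabRep (maps : List String) (L : List (List (Option Int)))
    (f : (Int × Int) → Option Int) : Prop :=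
  L.length = (H maps).toNat ∧
  (∀ r : Nat, r < (H maps).toNat → (L.getD r []).length = (W maps).toNat) ∧
  ∀ c : Int × Int, inb maps c → labAt L c.1 c.2 = f c

def ValidLab (maps : List String) (f : (Int × Int) → Option Int) : Prop :=
  (∀ c : Int × Int, inb maps c → ¬ land maps c → f c = none) ∧
  (∀ c : Int × Int, land maps c →
    ∃ d ∈ comp maps c, f c = some (idx maps d) ∧ idx maps d ≤ idx maps c)

def FixLab (maps : List String) (f : (Int × Int) → Option Int) : Prop :=
  ∀ c d : Int × Int, adjc maps c d → ∀ v w : Int, f c = some v → f d = some w → v ≤ w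

def ptLe (maps : List String) (f' f : (Int × Int) → Option Int) : Prop :=
  ∀ c : Int × Int, land maps c → ∀ v', f' c = some v' → ∃ v, f c = some v ∧ v' ≤ v

noncomputable def landF (maps : List String) : Finset (Int × Int) :=
  @Finset.filter _ (fun c => land maps c) (Classical.decPred _) (cells maps).toFinset

lemma mem_landF (maps : List String) (c : Int × Int) : c ∈ landF maps ↔ land maps c := by
  unfold landF
  rw [@Finset.mem_filter _ _ (Classical.decPred _)]
  constructor
  · exact fun h => h.2
  · intro h
    exact ⟨by rw [List.mem_toFinset, mem_cells]; exact h.1, h⟩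

noncomputable def Phi (maps : List String) (f : (Int × Int) → Option Int) : Nat :=
  ∑ c ∈ landF maps, ((f c).getD 0).toNat

lemma phi_le (maps : List String) {f' f : (Int × Int) → Option Int}
    (hv : ValidLab maps f') (hle : ptLe maps f' f) : Phi maps f' ≤ Phi maps f := by
  apply Finset.sum_le_sum
  intro c hc
  have hl : land maps c := (mem_landF maps c).mp hc
  obtain ⟨d, -, hfc, -⟩ := hv.2 c hl
  obtain ⟨v, hfv, hvle⟩ := hle c hl (idx maps d) hfc
  rw [hfc, hfv]
  simp
  omega

lemma phi_lt (maps : List String) {f' f : (Int × Int) → Option Int}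
    (hv : ValidLab maps f') (hle : ptLe maps f' f) {c0 : Int × Int} (hc0 : land maps c0)
    {v' v : Int} (h1 : f' c0 = some v') (h2 : f c0 = some v) (h3 : v' < v) (h4 : 0 ≤ v') :
    Phi maps f' < Phi maps f := by
  apply Finset.sum_lt_sum
  · intro c hc
    have hl : land maps c := (mem_landF maps c).mp hc
    obtain ⟨d, -, hfc, -⟩ := hv.2 c hl
    obtain ⟨w, hfw, hwle⟩ := hle c hl (idx maps d) hfc
    rw [hfc, hfw]
    simp
    omega
  · refine ⟨c0, (mem_landF maps c0).mpr hc0, ?_⟩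
    rw [h1, h2]
    simp
    omega

-- label grid update
noncomputable def updF (f : (Int × Int) → Option Int) (c : Int × Int) (val : Option Int) :
    (Int × Int) → Option Int :=
  fun d => @ite _ (d = c) (Classical.propDecidable _) val (f d)

lemma labRep_setLab (maps : List String) {L : List (List (Option Int))}
    {f : (Int × Int) → Option Int} (hL : LabRep maps L f) {c : Int × Int} (hc : inb maps c)
    (v : Int) : LabRep maps (setLab L c.1 c.2 v) (updF f c (some v)) := by
  obtain ⟨hlen, hrl, hcell⟩ := hL
  obtain ⟨h1, h2, h3, h4⟩ := hc
  have hn : c.1.toNat < L.length := by rw [hlen]; omega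
  have hk : c.2.toNat < (L.getD c.1.toNat []).length := by
    rw [hrl c.1.toNat (by omega)]; omega
  refine ⟨by simpa [setLab] using hlen, ?_, ?_⟩
  · intro r hr
    unfold setLab
    rw [getD_set_list]
    split
    · next h => rw [← h.1, List.length_set, hrl _ hr]
    · exact hrl r hr
  · intro d hd
    have hdin := hd
    obtain ⟨k1, k2, k3, k4⟩ := hd
    unfold setLab labAt updF
    rw [getD_set_list]
    by_cases hr : d.1.toNat = c.1.toNat
    · rw [if_pos ⟨hr, hn⟩, getD_set_list]
      by_cases hkk : d.2.toNat = c.2.toNat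
      · have hdc : d = c := by
          obtain ⟨a, b⟩ := d; obtain ⟨a', b'⟩ := c
          simp only [Prod.mk.injEq]
          simp only at *
          omega
        subst hdc
        rw [if_pos ⟨hkk, hk⟩, if_pos rfl]
      · have hne : d ≠ c := fun hh => hkk (by rw [hh])
        rw [if_neg (fun hh => hkk hh.1), if_neg hne]
        have := hcell d hdin
        unfold labAt at this
        rw [hr] at this
        exact this
    · have hne : d ≠ c := fun hh => hr (by rw [hh])
      rw [if_neg (fun hh => hr hh.1), if_neg hne]
      have := hcell d hdin
      unfold labAt at this
      exact this

-- the min-fold specification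
lemma nbrMin_fold_spec (maps : List String) (L : List (List (Option Int))) :
    ∀ (ns : List (Int × Int)) (m0 : Int),
      (ns.foldl (fun (m : Int) (p : Int × Int) =>
        if 0 ≤ p.1 ∧ p.1 < H maps ∧ 0 ≤ p.2 ∧ p.2 < W maps then
          match labAt L p.1 p.2 with
          | some v => if v < m then v else m
          | none => m
        else m) m0) ≤ m0 ∧
      (∀ p ∈ ns, inb maps p → ∀ v, labAt L p.1 p.2 = some v →
        (ns.foldl (fun (m : Int) (p : Int × Int) =>
          if 0 ≤ p.1 ∧ p.1 < H maps ∧ 0 ≤ p.2 ∧ p.2 < W maps then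
            match labAt L p.1 p.2 with
            | some v => if v < m then v else m
            | none => m
          else m) m0) ≤ v) ∧
      ((ns.foldl (fun (m : Int) (p : Int × Int) =>
          if 0 ≤ p.1 ∧ p.1 < H maps ∧ 0 ≤ p.2 ∧ p.2 < W maps then
            match labAt L p.1 p.2 with
            | some v => if v < m then v else m
            | none => m
          else m) m0) = m0 ∨
        ∃ p ∈ ns, inb maps p ∧ labAt L p.1 p.2 = some
          (ns.foldl (fun (m : Int) (p : Int × Int) =>
            if 0 ≤ p.1 ∧ p.1 < H maps ∧ 0 ≤ p.2 ∧ p.2 < W maps then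
              match labAt L p.1 p.2 with
              | some v => if v < m then v else m
              | none => m
            else m) m0)) := by
  intro ns
  induction ns with
  | nil => exact fun m0 => ⟨le_refl _, by simp, Or.inl rfl⟩
  | cons p t ih =>
    intro m0
    rw [List.foldl_cons]
    set m1 := (if 0 ≤ p.1 ∧ p.1 < H maps ∧ 0 ≤ p.2 ∧ p.2 < W maps then
          match labAt L p.1 p.2 with
          | some v => if v < m0 then v else m0
          | none => m0
        else m0) with hm1
    obtain ⟨ih1, ih2, ih3⟩ := ih m1
    have hm1le : m1 ≤ m0 := by
      rw [hm1]
      split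
      · split
        · split <;> omega
        · omega
      · omega
    have hm1case : m1 = m0 ∨ (inb maps p ∧ labAt L p.1 p.2 = some m1) := by
      rw [hm1]
      split
      · next hg =>
        have hinb : inb maps p := ⟨hg.1, hg.2.1, hg.2.2.1, hg.2.2.2⟩
        rcases hlab : labAt L p.1 p.2 with - | v
        · exact Or.inl rfl
        · simp only
          split
          · exact Or.inr ⟨hinb, rfl⟩
          · exact Or.inl rfl
      · exact Or.inl rfl
    refine ⟨le_trans ih1 hm1le, ?_, ?_⟩
    · intro q hq hqin v hqv
      rcases List.mem_cons.mp hq with rfl | hqt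
      · -- q = p
        have hm1v : m1 ≤ v := by
          rw [hm1, if_pos ⟨hqin.1, hqin.2.1, hqin.2.2.1, hqin.2.2.2⟩, hqv]
          simp only
          split <;> omega
        exact le_trans ih1 hm1v
      · exact ih2 q hqt hqin v hqv
    · rcases ih3 with h | ⟨q, hqt, hqin, hqv⟩
      · rw [h]
        rcases hm1case with h2 | ⟨hinb, hlab⟩
        · exact Or.inl h2
        · exact Or.inr ⟨p, by simp, hinb, hlab⟩
      · exact Or.inr ⟨q, by simp [hqt], hqin, hqv⟩

lemma nbrList_adj (maps : List String) {p d : Int × Int} (hp : land maps p)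
    (hd : land maps d) (hmem : d ∈ nbrList p.1 p.2) : adjc maps p d := by
  refine ⟨hp, hd, ?_⟩
  simp only [nbrList, List.mem_cons, List.not_mem_nil, or_false] at hmem
  rcases hmem with rfl | rfl | rfl | rfl
  · exact Or.inl ⟨rfl, rfl⟩
  · exact Or.inr (Or.inl ⟨rfl, rfl⟩)
  · exact Or.inr (Or.inr (Or.inl ⟨rfl, rfl⟩))
  · exact Or.inr (Or.inr (Or.inr ⟨rfl, rfl⟩))

lemma adj_mem_nbrList (maps : List String) {p d : Int × Int} (h : adjc maps p d) :
    d ∈ nbrList p.1 p.2 := by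
  rcases adj_offsets maps h with rfl | rfl | rfl | rfl <;> simp [nbrList]

def bodyS (maps : List String) (st : List (List (Option Int)) × Bool) (c : Int × Int) :
    List (List (Option Int)) × Bool :=
  match labAt st.1 c.1 c.2 with
  | none => st
  | some cur =>
      if nbrMin (H maps) (W maps) st.1 cur c.1 c.2 < cur then
        (setLab st.1 c.1 c.2 (nbrMin (H maps) (W maps) st.1 cur c.1 c.2), true)
      else st

lemma sweep_eq_foldS (maps : List String) (st : List (List (Option Int)) × Bool) :
    sweep (H maps) (W maps) st = (cells maps).foldl (bodyS maps) st := by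
  rw [sweep, cells, foldl_flatMap_eq]
  simp only [List.foldl_map]
  rfl

lemma idx_nonneg (maps : List String) {c : Int × Int} (hc : inb maps c) : 0 ≤ idx maps c := by
  obtain ⟨h1, h2, h3, h4⟩ := hc
  have : 0 ≤ c.1 * W maps := mul_nonneg h1 (by omega)
  unfold idx
  omega

lemma ptLe_refl (maps : List String) (f : (Int × Int) → Option Int) : ptLe maps f f :=
  fun c _ v' h => ⟨v', h, le_refl _⟩

lemma ptLe_trans (maps : List String) {f1 f2 f3 : (Int × Int) → Option Int}
    (h12 : ptLe maps f1 f2) (h23 : ptLe maps f2 f3) : ptLe maps f1 f3 := by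
  intro c hc v' h1
  obtain ⟨v2, h2, hle2⟩ := h12 c hc v' h1
  obtain ⟨v3, h3, hle3⟩ := h23 c hc v2 h2
  exact ⟨v3, h3, le_trans hle2 hle3⟩

lemma land_of_some (maps : List String) {f : (Int × Int) → Option Int}
    (hv : ValidLab maps f) {c : Int × Int} (hc : inb maps c) {v : Int}
    (h : f c = some v) : land maps c := by
  by_contra hn
  rw [hv.1 c hc hn] at h
  simp at h

lemma foldS_true (maps : List String) : ∀ (suf : List (Int × Int))
    (st : List (List (Option Int)) × Bool), st.2 = true →
    (suf.foldl (bodyS maps) st).2 = true := by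
  intro suf
  induction suf with
  | nil => exact fun st h => h
  | cons c t ih =>
    intro st h
    rw [List.foldl_cons]
    apply ih
    unfold bodyS
    rcases labAt st.1 c.1 c.2 with - | cur
    · exact h
    · simp only
      split
      · rfl
      · exact h

set_option maxHeartbeats 2000000 in
lemma sweep_descend (maps : List String) : ∀ (suf : List (Int × Int)),
    (∀ c ∈ suf, inb maps c) → ∀ (L : List (List (Option Int)))
    (f : (Int × Int) → Option Int) (b : Bool), LabRep maps L f → ValidLab maps f →
    ∃ f', LabRep maps (suf.foldl (bodyS maps) (L, b)).1 f' ∧ ValidLab maps f' ∧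
      ptLe maps f' f ∧ ((suf.foldl (bodyS maps) (L, b)).2 = b ∨ Phi maps f' < Phi maps f) := by
  intro suf
  induction suf with
  | nil => exact fun _ L f b hL hv => ⟨f, hL, hv, ptLe_refl maps f, Or.inl rfl⟩
  | cons c t ih =>
    intro hsub L f b hL hv
    have hcin : inb maps c := hsub c (by simp)
    have hlab : labAt L c.1 c.2 = f c := hL.2.2 c hcin
    rw [List.foldl_cons]
    rcases hfc : f c with - | cur
    · -- water cell: unchanged
      have hbody : bodyS maps (L, b) c = (L, b) := by
        unfold bodyS
        simp only [hlab, hfc]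
      rw [hbody]
      exact ih (fun d hd => hsub d (by simp [hd])) L f b hL hv
    · -- land cell
      have hlc : land maps c := land_of_some maps hv hcin hfc
      have hspec := nbrMin_fold_spec maps L (nbrList c.1 c.2) cur
      set m := nbrMin (H maps) (W maps) L cur c.1 c.2 with hmdef
      have hmfold : m = (nbrList c.1 c.2).foldl (fun (m : Int) (p : Int × Int) =>
          if 0 ≤ p.1 ∧ p.1 < H maps ∧ 0 ≤ p.2 ∧ p.2 < W maps then
            match labAt L p.1 p.2 with
            | some v => if v < m then v else m
            | none => m
          else m) cur := rfl
      obtain ⟨hle, hnb, hcase⟩ := hspec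
      rw [← hmfold] at hle hnb hcase
      by_cases hlt : m < cur
      · -- update
        have hmval : ∃ d ∈ comp maps c, m = idx maps d ∧ idx maps d ≤ idx maps c := by
          rcases hcase with he | ⟨p, hpmem, hpin, hplab⟩
          · omega
          · have hfp : f p = some m := by rw [← hplab]; exact (hL.2.2 p hpin).symm
            have hlp : land maps p := land_of_some maps hv hpin hfp
            obtain ⟨d, hd, hfd, -⟩ := hv.2 p hlp
            have hm_idx : m = idx maps d := by
              rw [hfp] at hfd
              exact Option.some.inj hfd
            have hadj : adjc maps c p := nbrList_adj maps hlc hlp hpmem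
            have hcc : comp maps c = comp maps p :=
              comp_congr maps hlc (Relation.ReflTransGen.single hadj)
            obtain ⟨e, he, hfe, hee⟩ := hv.2 c hlc
            have hcur : cur = idx maps e := by
              rw [hfc] at hfe
              exact Option.some.inj hfe
            exact ⟨d, by rw [hcc]; exact hd, hm_idx, by omega⟩
        obtain ⟨d, hdc, hmidx, hdle⟩ := hmval
        have hmnn : 0 ≤ m := by
          rw [hmidx]
          exact idx_nonneg maps (land_of_mem_comp maps hlc hdc).1
        have hbody : bodyS maps (L, b) c = (setLab L c.1 c.2 m, true) := by
          unfold bodyS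
          simp only [hlab, hfc]
          rw [if_pos hlt]
        rw [hbody]
        set f1 := updF f c (some m) with hf1
        have hL1 : LabRep maps (setLab L c.1 c.2 m) f1 := labRep_setLab maps hL hcin m
        have hv1 : ValidLab maps f1 := by
          constructor
          · intro e hein heland
            rw [hf1, updF]
            split
            · next hec => exact absurd (hec ▸ hlc) heland
            · exact hv.1 e hein heland
          · intro e hel
            rw [hf1, updF]
            split
            · next hec =>
              subst hec
              exact ⟨d, hdc, by rw [hmidx], hdle⟩
            · exact hv.2 e hel
        have hle1 : ptLe maps f1 f := by
          intro e hel v' hv'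
          rw [hf1, updF] at hv'
          split at hv'
          · next hec =>
            subst hec
            exact ⟨cur, hfc, by rw [← Option.some.inj hv']; omega⟩
          · exact ⟨v', hv', le_refl _⟩
        have hphi : Phi maps f1 < Phi maps f := by
          refine phi_lt maps hv1 hle1 hlc (v' := m) (v := cur) ?_ hfc hlt hmnn
          rw [hf1, updF]
          split
          · rfl
          · next hne => exact absurd rfl hne
        obtain ⟨f2, hL2, hv2, hle2, hdisj2⟩ :=
          ih (fun d hd => hsub d (by simp [hd])) (setLab L c.1 c.2 m) f1 true hL1 hv1
        refine ⟨f2, hL2, hv2, ptLe_trans maps hle2 hle1, Or.inr ?_⟩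
        calc Phi maps f2 ≤ Phi maps f1 := phi_le maps hv2 hle2
          _ < Phi maps f := hphi
      · -- no update
        have hbody : bodyS maps (L, b) c = (L, b) := by
          unfold bodyS
          simp only [hlab, hfc]
          rw [if_neg hlt]
        rw [hbody]
        exact ih (fun d hd => hsub d (by simp [hd])) L f b hL hv

set_option maxHeartbeats 2000000 in
lemma sweep_nochange (maps : List String) : ∀ (suf : List (Int × Int)),
    (∀ c ∈ suf, inb maps c) → ∀ (L : List (List (Option Int)))
    (f : (Int × Int) → Option Int), LabRep maps L f → ValidLab maps f →
    (suf.foldl (bodyS maps) (L, false)).2 = false →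
    (suf.foldl (bodyS maps) (L, false)).1 = L ∧
    ∀ c ∈ suf, ∀ d, adjc maps c d → ∀ v w, f c = some v → f d = some w → v ≤ w := by
  intro suf
  induction suf with
  | nil => exact fun _ L f hL hv _ => ⟨rfl, by simp⟩
  | cons c t ih =>
    intro hsub L f hL hv hfold
    have hcin : inb maps c := hsub c (by simp)
    have hlab : labAt L c.1 c.2 = f c := hL.2.2 c hcin
    rw [List.foldl_cons] at hfold ⊢
    rcases hfc : f c with - | cur
    · have hbody : bodyS maps (L, false) c = (L, false) := by
        unfold bodyS
        simp only [hlab, hfc]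
      rw [hbody] at hfold ⊢
      obtain ⟨h1, h2⟩ := ih (fun d hd => hsub d (by simp [hd])) L f hL hv hfold
      refine ⟨h1, ?_⟩
      intro e he d hadj v w hev hdw
      rcases List.mem_cons.mp he with rfl | het
      · rw [hfc] at hev; simp at hev
      · exact h2 e het d hadj v w hev hdw
    · have hlc : land maps c := land_of_some maps hv hcin hfc
      have hspec := nbrMin_fold_spec maps L (nbrList c.1 c.2) cur
      set m := nbrMin (H maps) (W maps) L cur c.1 c.2 with hmdef
      have hmfold : m = (nbrList c.1 c.2).foldl (fun (m : Int) (p : Int × Int) =>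
          if 0 ≤ p.1 ∧ p.1 < H maps ∧ 0 ≤ p.2 ∧ p.2 < W maps then
            match labAt L p.1 p.2 with
            | some v => if v < m then v else m
            | none => m
          else m) cur := rfl
      obtain ⟨hle, hnb, -⟩ := hspec
      rw [← hmfold] at hle hnb
      by_cases hlt : m < cur
      · exfalso
        have hbody : bodyS maps (L, false) c = (setLab L c.1 c.2 m, true) := by
          unfold bodyS
          simp only [hlab, hfc]
          rw [if_pos hlt]
        rw [hbody] at hfold
        rw [foldS_true maps t _ rfl] at hfold
        exact Bool.noConfusion hfold
      · have hbody : bodyS maps (L, false) c = (L, false) := by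
          unfold bodyS
          simp only [hlab, hfc]
          rw [if_neg hlt]
        rw [hbody] at hfold ⊢
        obtain ⟨h1, h2⟩ := ih (fun d hd => hsub d (by simp [hd])) L f hL hv hfold
        refine ⟨h1, ?_⟩
        intro e he d hadj v w hev hdw
        rcases List.mem_cons.mp he with rfl | het
        · -- e = c : use the min property
          have hveq : v = cur := by
            rw [hfc] at hev
            exact (Option.some.inj hev).symm
          have hdm : d ∈ nbrList e.1 e.2 := adj_mem_nbrList maps hadj
          have hdin : inb maps d := hadj.2.1.1
          have hdlab : labAt L d.1 d.2 = some w := by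
            rw [hL.2.2 d hdin, hdw]
          have := hnb d hdm hdin w hdlab
          omega
        · exact h2 e het d hadj v w hev hdw

lemma sweepLoop_run (maps : List String) : ∀ (fuel : Nat) (L : List (List (Option Int)))
    (f : (Int × Int) → Option Int), LabRep maps L f → ValidLab maps f →
    Phi maps f < fuel →
    ∃ f', LabRep maps (sweepLoop (H maps) (W maps) fuel L) f' ∧ ValidLab maps f' ∧
      FixLab maps f' := by
  intro fuel
  induction fuel with
  | zero => intro L f _ _ h; omega
  | succ fuel ih =>
    intro L f hL hv hphi
    have hcellsin : ∀ c ∈ cells maps, inb maps c := fun c hc => (mem_cells maps c).mp hc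
    obtain ⟨f1, hL1, hv1, hle1, hd1⟩ :=
      sweep_descend maps (cells maps) hcellsin L f false hL hv
    have hunf : sweepLoop (H maps) (W maps) (fuel + 1) L =
        (if (sweep (H maps) (W maps) (L, false)).2 then
          sweepLoop (H maps) (W maps) fuel (sweep (H maps) (W maps) (L, false)).1
        else (sweep (H maps) (W maps) (L, false)).1) := rfl
    rw [hunf, sweep_eq_foldS]
    cases hch : ((cells maps).foldl (bodyS maps) (L, false)).2 with
    | true =>
      rw [if_pos rfl]
      apply ih _ f1 hL1 hv1
      rcases hd1 with hfalse | hlt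
      · rw [hch] at hfalse; exact Bool.noConfusion hfalse
      · omega
    | false =>
      rw [if_neg Bool.false_ne_true]
      obtain ⟨heq, hfixcl⟩ := sweep_nochange maps (cells maps) hcellsin L f hL hv hch
      refine ⟨f, by rw [heq]; exact hL, hv, ?_⟩
      intro c d hadj v w hcv hdw
      have hcc : c ∈ cells maps := (mem_cells maps c).mpr hadj.1.1
      exact hfixcl c hcc d hadj v w hcv hdw

lemma fix_const (maps : List String) {f : (Int × Int) → Option Int}
    (hv : ValidLab maps f) (hfix : FixLab maps f) {c d : Int × Int} (hc : land maps c)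
    (hr : Reach maps c d) : f c = f d := by
  induction hr with
  | refl => rfl
  | tail hab hbc ih =>
    rename_i b e
    have hlb : land maps b := hbc.1
    have hle : land maps e := hbc.2.1
    obtain ⟨x, -, hbx, -⟩ := hv.2 b hlb
    obtain ⟨y, -, hey, -⟩ := hv.2 e hle
    have h1 := hfix b e hbc _ _ hbx hey
    have h2 := hfix e b (adj_symm maps hbc) _ _ hey hbx
    rw [ih, hbx, hey]
    congr 1
    omega

lemma fix_eq_min (maps : List String) {f : (Int × Int) → Option Int}
    (hv : ValidLab maps f) (hfix : FixLab maps f) {c m : Int × Int} (hc : land maps c)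
    (hm : m ∈ comp maps c) (hmin : isMin maps m) : f c = some (idx maps m) := by
  have hrm : Reach maps c m := (mem_comp maps hc).mp hm
  have hconst := fix_const maps hv hfix hc hrm
  obtain ⟨e, he, hfe, hele⟩ := hv.2 m hmin.1
  have hem : e ∈ comp maps m := he
  have hge : idx maps m ≤ idx maps e := hmin.2 e he
  rw [hconst, hfe]
  congr 1
  omega

-- grouping helpers
noncomputable def minsOf (maps : List String) : List (Int × Int) → List (Int × Int)
  | [] => []
  | c :: t =>
      @ite _ (isMin maps c) (Classical.propDecidable _) (c :: minsOf maps t) (minsOf maps t)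

lemma mem_minsOf (maps : List String) (l : List (Int × Int)) (m : Int × Int) :
    m ∈ minsOf maps l ↔ m ∈ l ∧ isMin maps m := by
  induction l with
  | nil => simp [minsOf]
  | cons c t ih =>
    rw [minsOf]
    split
    · next h =>
      simp only [List.mem_cons, ih]
      constructor
      · rintro (rfl | ⟨h1, h2⟩)
        · exact ⟨Or.inl rfl, h⟩
        · exact ⟨Or.inr h1, h2⟩
      · rintro ⟨rfl | h1, h2⟩
        · exact Or.inl rfl
        · exact Or.inr ⟨h1, h2⟩
    · next h =>
      rw [ih]
      simp only [List.mem_cons]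
      constructor
      · rintro ⟨h1, h2⟩
        exact ⟨Or.inr h1, h2⟩
      · rintro ⟨rfl | h1, h2⟩
        · exact absurd h2 h
        · exact ⟨h1, h2⟩

lemma minsOf_append (maps : List String) (l1 l2 : List (Int × Int)) :
    minsOf maps (l1 ++ l2) = minsOf maps l1 ++ minsOf maps l2 := by
  induction l1 with
  | nil => simp [minsOf]
  | cons c t ih =>
    rw [List.cons_append, minsOf, minsOf]
    split
    · rw [ih, List.cons_append]
    · exact ih

lemma nodup_minsOf (maps : List String) (l : List (Int × Int)) (h : l.Nodup) :
    (minsOf maps l).Nodup := by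
  induction l with
  | nil => simp [minsOf]
  | cons c t ih =>
    rw [minsOf]
    obtain ⟨hc, ht⟩ := List.nodup_cons.mp h
    split
    · exact List.nodup_cons.mpr ⟨fun hm => hc ((mem_minsOf maps t c).mp hm).1, ih ht⟩
    · exact ih ht

lemma minsSums_eq_map (maps : List String) (l : List (Int × Int)) :
    minsSums maps l = (minsOf maps l).map (compSum maps) := by
  induction l with
  | nil => simp [minsSums, minsOf]
  | cons c t ih =>
    rw [minsSums, minsOf]
    split
    · rw [List.map_cons, ih]
    · exact ih

noncomputable def psum (maps : List String) (l : List (Int × Int)) (m : Int × Int) : Int :=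
  ((l.filter (fun c => decide (c ∈ comp maps m))).map (iv maps)).sum

lemma psum_append_one (maps : List String) (l : List (Int × Int)) (p m : Int × Int) :
    psum maps (l ++ [p]) m =
      psum maps l m + (if p ∈ comp maps m then iv maps p else 0) := by
  unfold psum
  rw [List.filter_append, List.map_append, List.sum_append]
  congr 1
  simp only [List.filter_cons, List.filter_nil]
  by_cases h : p ∈ comp maps m <;> simp [h]

lemma psum_zero (maps : List String) (l : List (Int × Int)) (m : Int × Int)
    (h : ∀ c ∈ l, c ∉ comp maps m) : psum maps l m = 0 := by
  unfold psum
  rw [List.filter_eq_nil_iff.mpr]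
  · rfl
  · intro c hc
    simp [h c hc]

lemma psum_full (maps : List String) {m : Int × Int} (hm : land maps m) :
    psum maps (cells maps) m = compSum maps m := by
  unfold psum compSum
  have hfin : comp maps m =
      ((cells maps).filter (fun c => decide (c ∈ comp maps m))).toFinset := by
    ext d
    rw [List.mem_toFinset, List.mem_filter]
    constructor
    · intro hd
      refine ⟨?_, by simp [hd]⟩
      rw [mem_cells]
      exact (land_of_mem_comp maps hm hd).1
    · rintro ⟨-, hd⟩
      exact of_decide_eq_true hd
  conv_rhs => rw [hfin]
  exact (List.sum_toFinset (iv maps) (List.Nodup.filter _ (nodup_cells maps))).symm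

def bodyD (maps : List String) (L : List (List (Option Int)))
    (d : PySem.Dict Int Int) (c : Int × Int) : PySem.Dict Int Int :=
  match labAt L c.1 c.2 with
  | none => d
  | some k => d.insert k (d.getD k 0 + intAt (cellB maps c.1 c.2))

lemma earlier_mem (maps : List String) {pref suf : List (Int × Int)} {p m : Int × Int}
    (hsplit : cells maps = pref ++ p :: suf) (hm : m ∈ cells maps)
    (hlt : idx maps m < idx maps p) : m ∈ pref := by
  rw [hsplit] at hm
  rcases List.mem_append.mp hm with h | h
  · exact h
  · exfalso
    rcases List.mem_cons.mp h with rfl | h2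
    · omega
    · have hpair := pairwise_idx_cells maps
      rw [hsplit] at hpair
      have := (List.pairwise_append.mp hpair).2.1
      have := (List.pairwise_cons.mp this).1 m h2
      omega

set_option maxHeartbeats 2000000 in
lemma groupScan (maps : List String) (L : List (List (Option Int)))
    (hkey : ∀ c : Int × Int, land maps c →
      ∃ m, m ∈ comp maps c ∧ isMin maps m ∧ labAt L c.1 c.2 = some (idx maps m))
    (hwater : ∀ c : Int × Int, inb maps c → ¬ land maps c → labAt L c.1 c.2 = none) :
    ∀ (suf pref : List (Int × Int)), cells maps = pref ++ suf →
    ∀ d : PySem.Dict Int Int,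
      d.items = (minsOf maps pref).map (fun m => (idx maps m, psum maps pref m)) →
      (suf.foldl (bodyD maps L) d).items =
        (minsOf maps (pref ++ suf)).map (fun m => (idx maps m, psum maps (pref ++ suf) m)) := by
  intro suf
  induction suf with
  | nil =>
    intro pref hsplit d hitems
    simpa using hitems
  | cons p suf' ih =>
    intro pref hsplit d hitems
    have hpmem : p ∈ cells maps := by rw [hsplit]; simp
    have hpinb : inb maps p := (mem_cells maps p).mp hpmem
    have hnd := nodup_cells maps
    rw [hsplit] at hnd
    have hnddisj := List.disjoint_of_nodup_append hnd
    have hpnotpref : p ∉ pref := fun h => hnddisj h (by simp)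
    have hndpref : pref.Nodup := (List.nodup_append.mp hnd).1
    have hassoc : pref ++ p :: suf' = (pref ++ [p]) ++ suf' := by simp
    have hminsmem : ∀ m' ∈ minsOf maps pref, m' ∈ pref ∧ isMin maps m' :=
      fun m' h => (mem_minsOf maps pref m').mp h
    rw [List.foldl_cons, hassoc]
    have hkeys : d.keys = (minsOf maps pref).map (fun m => idx maps m) := by
      show d.items.map (·.1) = _
      rw [hitems, List.map_map]
      rfl
    have hndkeys : d.keys.Nodup := by
      rw [hkeys]
      refine List.Nodup.map_on ?_ (nodup_minsOf maps pref hndpref)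
      intro a ha b hb hab
      exact idx_inj maps ((hminsmem a ha).2.1.1) ((hminsmem b hb).2.1.1) hab
    by_cases hland : land maps p
    · obtain ⟨m0, hpm0', hm0min, hlab⟩ := hkey p hland
      have hreach_pm0 : Reach maps p m0 := (mem_comp maps hland).mp hpm0'
      have hcompeq : comp maps p = comp maps m0 := comp_congr maps hland hreach_pm0
      have hpm0 : p ∈ comp maps m0 := by
        rw [← hcompeq]; exact self_mem_comp maps hland
      have hm0inb : inb maps m0 := hm0min.1.1
      have hbody : bodyD maps L d p =
          d.insert (idx maps m0) (d.getD (idx maps m0) 0 + iv maps p) := by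
        unfold bodyD
        rw [hlab]
        rfl
      rw [hbody]
      by_cases hminp : isMin maps p
      · -- fresh island minimum
        have hm0p : m0 = p := min_unique maps hm0min hminp (reach_symm maps hreach_pm0)
        rw [hm0p]
        have hnotmem : d.contains (idx maps p) = false := by
          rw [Bool.eq_false_iff]
          intro hcont
          have hmemk := (PySem.Dict.contains_iff_mem_keys d (idx maps p)).mp hcont
          rw [hkeys] at hmemk
          obtain ⟨m', hm', heq⟩ := List.mem_map.mp hmemk
          have : m' = p := idx_inj maps ((hminsmem m' hm').2.1.1) hpinb heq
          subst this
          exact hpnotpref (hminsmem m' hm').1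
        have hpsum0 : psum maps pref p = 0 := by
          apply psum_zero
          intro e he hec
          have hee : e ∈ cells maps := by rw [hsplit]; exact List.mem_append_left _ he
          have heinb : inb maps e := (mem_cells maps e).mp hee
          have hle := hminp.2 e hec
          have hpair := pairwise_idx_cells maps
          rw [hsplit] at hpair
          have := (List.pairwise_append.mp hpair).2.2 e he p (by simp)
          omega
        have hd' : (d.insert (idx maps p) (d.getD (idx maps p) 0 + iv maps p)).items =
            (minsOf maps (pref ++ [p])).map
              (fun m => (idx maps m, psum maps (pref ++ [p]) m)) := by
          rw [PySem.Dict.items_insert_of_not_contains d _ hnotmem,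
            PySem.Dict.getD_of_not_contains d _ hnotmem, hitems, minsOf_append]
          have hminsp : minsOf maps [p] = [p] := by
            rw [minsOf, if_pos hminp]
            rfl
          rw [hminsp, List.map_append]
          congr 1
          · apply List.map_congr_left
            intro m' hm'
            have hnotin : p ∉ comp maps m' := by
              intro hin
              have hlm' : land maps m' := (hminsmem m' hm').2.1
              have hmm : m' = p := min_unique maps (hminsmem m' hm').2 hminp
                ((mem_comp maps hlm').mp hin)
              rw [hmm] at hm'
              exact hpnotpref (hminsmem p hm').1
            rw [psum_append_one, if_neg hnotin]
            norm_num
          · simp only [List.map_cons, List.map_nil]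
            rw [psum_append_one, if_pos (self_mem_comp maps hland), hpsum0]
        exact ih (pref ++ [p]) (by rw [hsplit, hassoc]) _ hd'
      · -- interior cell of an already-keyed island
        have hm0ne : m0 ≠ p := fun h => hminp (h ▸ hm0min)
        have hm0lt : idx maps m0 < idx maps p := by
          have hle := hm0min.2 p hpm0
          rcases lt_or_eq_of_le hle with h | h
          · exact h
          · exact absurd (idx_inj maps hm0inb hpinb h) hm0ne
        have hm0pref : m0 ∈ pref :=
          earlier_mem maps hsplit ((mem_cells maps m0).mpr hm0inb) hm0lt
        have hm0mins : m0 ∈ minsOf maps pref :=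
          (mem_minsOf maps pref m0).mpr ⟨hm0pref, hm0min⟩
        have hmem_items : (idx maps m0, psum maps pref m0) ∈ d.items := by
          rw [hitems]
          exact List.mem_map.mpr ⟨m0, hm0mins, rfl⟩
        have hgetD : d.getD (idx maps m0) 0 = psum maps pref m0 :=
          PySem.Dict.getD_of_mem_items d hmem_items hndkeys 0
        have hcont : d.contains (idx maps m0) = true := by
          rw [PySem.Dict.contains_iff_mem_keys, hkeys]
          exact List.mem_map.mpr ⟨m0, hm0mins, rfl⟩
        have hd' : (d.insert (idx maps m0) (d.getD (idx maps m0) 0 + iv maps p)).items =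
            (minsOf maps (pref ++ [p])).map
              (fun m => (idx maps m, psum maps (pref ++ [p]) m)) := by
          rw [PySem.Dict.items_insert_of_contains d _ hcont, hitems, List.map_map,
            minsOf_append]
          have hminsp : minsOf maps [p] = [] := by
            rw [minsOf, if_neg hminp]
            rfl
          rw [hminsp, List.append_nil]
          apply List.map_congr_left
          intro m' hm'
          simp only [Function.comp]
          by_cases hm'm0 : m' = m0
          · subst hm'm0
            rw [if_pos (by simp), hgetD, psum_append_one, if_pos hpm0]
          · have hne : idx maps m' ≠ idx maps m0 := fun h =>
              hm'm0 (idx_inj maps ((hminsmem m' hm').2.1.1) hm0inb h)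
            rw [if_neg (by simpa using hne), psum_append_one]
            have hnotin : p ∉ comp maps m' := by
              intro hin
              have hlm' : land maps m' := (hminsmem m' hm').2.1
              have hmm : m' = m0 := min_unique maps (hminsmem m' hm').2 hm0min
                (((mem_comp maps hlm').mp hin).trans hreach_pm0)
              exact hm'm0 hmm
            rw [if_neg hnotin]
            norm_num
        exact ih (pref ++ [p]) (by rw [hsplit, hassoc]) _ hd'
    · -- water cell
      have hbody : bodyD maps L d p = d := by
        unfold bodyD
        rw [hwater p hpinb hland]
      rw [hbody]
      have hd' : d.items = (minsOf maps (pref ++ [p])).map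
          (fun m => (idx maps m, psum maps (pref ++ [p]) m)) := by
        rw [hitems, minsOf_append]
        have hminsp : minsOf maps [p] = [] := by
          rw [minsOf, if_neg (fun h => hland h.1)]
          rfl
        rw [hminsp, List.append_nil]
        apply List.map_congr_left
        intro m' hm'
        have hnotin : p ∉ comp maps m' := fun hin =>
          hland (land_of_mem_comp maps ((mem_minsOf maps pref m').mp hm').2.1 hin)
        rw [psum_append_one, if_neg hnotin]
        norm_num
      exact ih (pref ++ [p]) (by rw [hsplit, hassoc]) d hd'

-- initial labelling
noncomputable def f0 (maps : List String) : (Int × Int) → Option Int :=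
  fun c => if cellB maps c.1 c.2 ≠ 'X' then some (c.1 * W maps + c.2) else none

lemma labRep_init (maps : List String) :
    LabRep maps
      ((PySem.List.pyRange 0 (H maps) 1).map (fun i =>
        (PySem.List.pyRange 0 (W maps) 1).map (fun j =>
          if cellB maps i j ≠ 'X' then some (i * W maps + j) else none)))
      (f0 maps) := by
  have hH : H maps = ((maps.length : Nat) : Int) := rfl
  have hW : W maps = (((maps.headD "").toList.length : Nat) : Int) := rfl
  refine ⟨?_, ?_, ?_⟩
  · rw [List.length_map, PySem.List.length_pyRange_one]
    simp [H]
  · intro r hr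
    rw [hH] at hr ⊢
    rw [← PySem.List.pyGetD_natCast _ r]
    rw [PySem.List.pyGetD_map_pyRange _ maps.length r _ (by simpa [H] using hr)]
    rw [List.length_map, PySem.List.length_pyRange_one]
    simp
  · intro c hc
    obtain ⟨h1, h2, h3, h4⟩ := hc
    unfold labAt
    rw [← PySem.List.pyGetD_natCast _ c.1.toNat]
    rw [hH] at h2
    rw [hH, ← PySem.List.pyGetD_natCast _ c.2.toNat]
    rw [PySem.List.pyGetD_map_pyRange _ maps.length c.1.toNat _ (by omega)]
    rw [hW] at h4 ⊢
    rw [PySem.List.pyGetD_map_pyRange _ _ c.2.toNat _ (by omega)]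
    rw [Int.toNat_of_nonneg h1, Int.toNat_of_nonneg h3]
    unfold f0
    rw [← hW]

lemma valid_f0 (maps : List String) : ValidLab maps (f0 maps) := by
  constructor
  · intro c hc hnl
    unfold f0
    rw [if_neg]
    intro hne
    exact hnl ⟨hc, hne⟩
  · intro c hc
    refine ⟨c, self_mem_comp maps hc, ?_, le_refl _⟩
    unfold f0
    rw [if_pos (show cellB maps c.1 c.2 ≠ 'X' from hc.2)]
    rfl

lemma phi_f0_bound (maps : List String) :
    Phi maps (f0 maps) < (H maps).toNat * (W maps).toNat * ((H maps).toNat * (W maps).toNat) + 1 := by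
  have hb : ∀ c ∈ landF maps, ((f0 maps c).getD 0).toNat ≤ (H maps).toNat * (W maps).toNat := by
    intro c hc
    have hl : land maps c := (mem_landF maps c).mp hc
    obtain ⟨h1, h2, h3, h4⟩ := hl.1
    unfold f0
    rw [if_pos (show cellB maps c.1 c.2 ≠ 'X' from hl.2)]
    simp only [Option.getD_some]
    have hmul : (c.1 + 1) * W maps ≤ H maps * W maps :=
      mul_le_mul_of_nonneg_right (by omega) (by omega)
    have hHW : H maps * W maps = ((H maps).toNat * (W maps).toNat : Nat) := by
      rw [Nat.cast_mul, Int.toNat_of_nonneg (by omega : (0:Int) ≤ H maps),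
        Int.toNat_of_nonneg (by omega : (0:Int) ≤ W maps)]
    have : c.1 * W maps + c.2 < H maps * W maps := by nlinarith
    omega
  have hsum := Finset.sum_le_card_nsmul (landF maps) _ _ hb
  have hcard : (landF maps).card ≤ (H maps).toNat * (W maps).toNat := by
    calc (landF maps).card ≤ (cells maps).toFinset.card :=
          Finset.card_le_card
            (@Finset.filter_subset _ (fun c => land maps c) (Classical.decPred _) _)
      _ ≤ (cells maps).length := (cells maps).toFinset_card_le
      _ = (H maps).toNat * (W maps).toNat := length_cells maps
  unfold Phi
  have := hsum
  rw [smul_eq_mul] at this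
  calc ∑ c ∈ landF maps, ((f0 maps c).getD 0).toNat
      ≤ (landF maps).card * ((H maps).toNat * (W maps).toNat) := this
    _ ≤ (H maps).toNat * (W maps).toNat * ((H maps).toNat * (W maps).toNat) :=
        Nat.mul_le_mul_right _ hcard
    _ < _ := Nat.lt_succ_self _

set_option maxHeartbeats 2000000 in
lemma groupTop (maps : List String) (L : List (List (Option Int)))
    (hkey : ∀ c : Int × Int, land maps c →
      ∃ m, m ∈ comp maps c ∧ isMin maps m ∧ labAt L c.1 c.2 = some (idx maps m))
    (hwater : ∀ c : Int × Int, inb maps c → ¬ land maps c → labAt L c.1 c.2 = none) :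
    PySem.Dict.values
      ((PySem.List.pyRange 0 (H maps) 1).foldl (fun (d : PySem.Dict Int Int) i =>
        (PySem.List.pyRange 0 (W maps) 1).foldl (fun d j =>
          match labAt L i j with
          | none => d
          | some k => d.insert k (d.getD k 0 + intAt (cellB maps i j))) d)
        PySem.Dict.empty) = minsSums maps (cells maps) := by
  have hfold : ((cells maps).foldl (bodyD maps L) PySem.Dict.empty) =
      ((PySem.List.pyRange 0 (H maps) 1).foldl (fun (d : PySem.Dict Int Int) i =>
        (PySem.List.pyRange 0 (W maps) 1).foldl (fun d j =>
          match labAt L i j with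
          | none => d
          | some k => d.insert k (d.getD k 0 + intAt (cellB maps i j))) d)
        PySem.Dict.empty) := by
    rw [cells, foldl_flatMap_eq]
    simp only [List.foldl_map]
    rfl
  rw [← hfold]
  have hitems := groupScan maps L hkey hwater (cells maps) [] rfl PySem.Dict.empty (by
    rw [show minsOf maps [] = [] from rfl]
    rfl)
  show ((cells maps).foldl (bodyD maps L) PySem.Dict.empty).items.map (·.2) = _
  rw [hitems]
  simp only [List.nil_append, List.map_map]
  rw [minsSums_eq_map]
  apply List.map_congr_left
  intro m hm
  have hlm : land maps m := ((mem_minsOf maps (cells maps) m).mp hm).2.1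
  simp only [Function.comp]
  exact psum_full maps hlm

set_option maxHeartbeats 2000000 in
lemma solutionB_char (maps : List String) :
    solution_alt maps =
      (if (PySem.List.sorted (minsSums maps (cells maps)) (fun x => x) false).length = 0
        then [-1]
        else PySem.List.sorted (minsSums maps (cells maps)) (fun x => x) false) := by
  have hwB : (if maps.isEmpty = true then (0 : Int)
      else (((maps.headD "").toList.length : Nat) : Int)) = W maps := by
    cases maps <;> simp [W]
  have hhB : ((maps.length : Nat) : Int) = H maps := rfl
  unfold solution_alt
  simp only [hwB, hhB]
  have hkey : ∀ c : Int × Int, land maps c →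
      ∃ m, m ∈ comp maps c ∧ isMin maps m ∧
        labAt (sweepLoop (H maps) (W maps)
          ((H maps).toNat * (W maps).toNat * ((H maps).toNat * (W maps).toNat) + 1)
          ((PySem.List.pyRange 0 (H maps) 1).map (fun i =>
            (PySem.List.pyRange 0 (W maps) 1).map (fun j =>
              if cellB maps i j ≠ 'X' then some (i * W maps + j) else none))))
          c.1 c.2 = some (idx maps m) := by
    obtain ⟨f', hLrep, hval, hfix⟩ := sweepLoop_run maps
      ((H maps).toNat * (W maps).toNat * ((H maps).toNat * (W maps).toNat) + 1)
      ((PySem.List.pyRange 0 (H maps) 1).map (fun i =>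
        (PySem.List.pyRange 0 (W maps) 1).map (fun j =>
          if cellB maps i j ≠ 'X' then some (i * W maps + j) else none)))
      (f0 maps) (labRep_init maps) (valid_f0 maps) (phi_f0_bound maps)
    intro c hc
    obtain ⟨m, hm, hmin⟩ := exists_min maps hc
    refine ⟨m, hm, hmin, ?_⟩
    rw [hLrep.2.2 c hc.1]
    exact fix_eq_min maps hval hfix hc hm hmin
  have hwater : ∀ c : Int × Int, inb maps c → ¬ land maps c →
      labAt (sweepLoop (H maps) (W maps)
          ((H maps).toNat * (W maps).toNat * ((H maps).toNat * (W maps).toNat) + 1)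
          ((PySem.List.pyRange 0 (H maps) 1).map (fun i =>
            (PySem.List.pyRange 0 (W maps) 1).map (fun j =>
              if cellB maps i j ≠ 'X' then some (i * W maps + j) else none))))
          c.1 c.2 = none := by
    obtain ⟨f', hLrep, hval, hfix⟩ := sweepLoop_run maps
      ((H maps).toNat * (W maps).toNat * ((H maps).toNat * (W maps).toNat) + 1)
      ((PySem.List.pyRange 0 (H maps) 1).map (fun i =>
        (PySem.List.pyRange 0 (W maps) 1).map (fun j =>
          if cellB maps i j ≠ 'X' then some (i * W maps + j) else none)))
      (f0 maps) (labRep_init maps) (valid_f0 maps) (phi_f0_bound maps)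
    intro c hc hnl
    rw [hLrep.2.2 c hc]
    exact hval.1 c hc hnl
  rw [groupTop maps _ hkey hwater]
  by_cases he : PySem.List.sorted (minsSums maps (cells maps)) (fun x => x) false = []
  · rw [if_pos he, if_pos (by rw [he]; rfl)]
  · rw [if_neg he, if_neg (fun h => he (by rwa [List.length_eq_zero_iff] at h))]

lemma rowsOk_of_pre (maps : List String) (hpre : Pre_solution maps) : RowsOk maps := by
  intro r hr
  have hmem : maps.getD r "" ∈ maps := by
    rw [List.getD_eq_getElem?_getD, List.getElem?_eq_getElem hr]
    exact List.getElem_mem hr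
  have h1 := (hpre _ hmem).1
  have hW : (W maps).toNat = (maps.headD "").toList.length := by
    unfold W
    simp
  omega

-- ===== VERDICT (by name: the statement is the Claim_ definition above) =====
theorem solution_spec : Claim_equal_solution := by
  intro maps _ hpre
  unfold Spec_solution
  rw [solutionA_char maps (rowsOk_of_pre maps hpre), solutionB_char maps]
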